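-- pv_equiv track=rewrite | github.com/irivers6119/image_text_numbers | ppm_digits_extractor.py | count_holes
-- ===== SOURCE A (Python) =====
-- def count_holes(subimg):
--     """Count holes (enclosed white regions) inside the subimage where 1=black,0=white."""
--     h = len(subimg)
--     w = len(subimg[0])
--     visited = [[False] * w for _ in range(h)]
--
--     def flood(x, y):
--         stack = [(x, y)]
--         enclosed = True
--         cells = []
--         while stack:
--             cx, cy = stack.pop()
--             if cx < 0 or cy < 0 or cx >= w or cy >= h:
--                 continue
--             if visited[cy][cx] or subimg[cy][cx] == 1:
--                 continue
--             visited[cy][cx] = True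
--             cells.append((cx, cy))
--             # Touching boundary means not a hole
--             if cx == 0 or cy == 0 or cx == w - 1 or cy == h - 1:
--                 enclosed = False
--             for dx, dy in [(-1,0),(1,0),(0,-1),(0,1)]:
--                 stack.append((cx+dx, cy+dy))
--         return enclosed
--
--     holes = 0
--     for y in range(h):
--         for x in range(w):
--             if subimg[y][x] == 0 and not visited[y][x]:
--                 if flood(x, y):
--                     holes += 1
--     return holes
-- ===== SOURCE B (Python) =====
-- def count_holes(subimg):
--     """Count holes (enclosed white regions) inside the subimage where 1=black,0=white."""
--     h = len(subimg)
--     w = len(subimg[0])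
--
--     # Union-find over non-black cells, keyed by id = y*w + x; roots are minimal ids.
--     parent = {}
--
--     def find(i):
--         while parent[i] != i:
--             i = parent[i]
--         return i
--
--     def union(i, j):
--         ri, rj = find(i), find(j)
--         if ri < rj:
--             parent[rj] = ri
--         elif rj < ri:
--             parent[ri] = rj
--
--     for y in range(h):
--         for x in range(w):
--             if subimg[y][x] != 1:
--                 i = y * w + x
--                 parent[i] = i
--                 if x > 0 and subimg[y][x - 1] != 1:
--                     union(i, i - 1)
--                 if y > 0 and subimg[y - 1][x] != 1:
--                     union(i, i - w)
--
--     whites = set()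
--     borders = set()
--     for i in parent:
--         r = find(i)
--         y, x = divmod(i, w)
--         if subimg[y][x] == 0:
--             whites.add(r)
--         if x == 0 or y == 0 or x == w - 1 or y == h - 1:
--             borders.add(r)
--     return len(whites - borders)
-- ===== Notes on version B (the rewrite author's own statement) =====
-- stated objective: alternative
-- what changed: A flood-fills each white region with an explicit DFS stack and a shared visited matrix, counting floods that never touch the border; B builds a union-find over all non-black cells (one scan unioning each cell with its left and up neighbours), then counts roots whose component contains a white cell and no border cell. Pre_ excludes only inputs on which A raises IndexError: an empty image or a row shorter than row 0.
import Mathlib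
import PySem

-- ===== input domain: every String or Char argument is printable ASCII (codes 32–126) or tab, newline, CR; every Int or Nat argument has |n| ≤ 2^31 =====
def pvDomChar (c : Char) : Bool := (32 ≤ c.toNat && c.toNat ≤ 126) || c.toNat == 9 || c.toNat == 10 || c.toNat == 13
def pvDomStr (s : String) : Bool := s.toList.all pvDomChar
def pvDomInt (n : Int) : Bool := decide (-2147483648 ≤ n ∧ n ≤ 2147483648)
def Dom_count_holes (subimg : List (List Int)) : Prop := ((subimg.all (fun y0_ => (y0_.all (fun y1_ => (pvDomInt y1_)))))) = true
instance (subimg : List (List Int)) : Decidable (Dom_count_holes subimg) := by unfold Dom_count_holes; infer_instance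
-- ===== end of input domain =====

-- B replaces A's DFS flood fill (explicit stack + shared visited matrix) by a union-find
-- over all non-black cells with a final count of components that contain a white cell and
-- no border cell; same return value on every input admitted by Pre_ (objective: alternative).

-- ### helper lemmas the ports need for termination (cited by decreasing_by) ###

theorem pvSumSetLt (l : List Nat) (i : Nat) (a : Nat) (h : i < l.length) (hlt : a < l[i]) :
    (l.set i a).sum < l.sum := by
  have h1 : l.sum = (l.take i).sum + (l[i] + (l.drop (i+1)).sum) := by
    conv_lhs => rw [← List.take_append_drop i l, List.drop_eq_getElem_cons h]
    rw [List.sum_append, List.sum_cons]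
  rw [List.set_eq_take_cons_drop a h, List.sum_append, List.sum_cons, h1]
  omega

def pvCountFalse (v : List (List Bool)) : Nat :=
  (v.map (fun r => r.count false)).sum

theorem pvCountFalse_set (v : List (List Bool)) (i j : Nat)
    (hf : (v.getD i []).getD j true = false) :
    pvCountFalse (v.set i ((v.getD i []).set j true)) < pvCountFalse v := by
  have hi : i < v.length := by
    by_contra hi
    simp [List.getD_eq_getElem?_getD, List.getElem?_eq_none (by omega : v.length ≤ i)] at hf
  have hrow : v.getD i [] = v[i] := by
    simp [List.getD_eq_getElem?_getD, List.getElem?_eq_getElem hi]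
  rw [hrow] at hf ⊢
  have hj : j < v[i].length := by
    by_contra hj
    simp [List.getD_eq_getElem?_getD, List.getElem?_eq_none (by omega : v[i].length ≤ j)] at hf
  have hval : v[i][j] = false := by
    simpa [List.getD_eq_getElem?_getD, List.getElem?_eq_getElem hj] using hf
  have hcount : (v[i].set j true).count false < v[i].count false := by
    rw [List.set_eq_take_cons_drop true hj]
    conv_rhs => rw [← List.take_append_drop j v[i], List.drop_eq_getElem_cons hj, hval]
    simp [List.count_append]
  unfold pvCountFalse
  rw [List.map_set]
  exact pvSumSetLt _ i _ (by simpa using hi) (by simpa using hcount)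

-- ===== PORT A =====
-- A's inner `flood`: explicit DFS stack, popping from the end, marking a shared
-- visited matrix; indices are read after the bounds guard, so plain `getD`/`set`
-- on `.toNat` is exact there (default `true` for visited = treat as seen).
def floodLoop (g : List (List Int)) (w h : Int) (stack : List (Int × Int))
    (visited : List (List Bool)) (enclosed : Bool) (cells : List (Int × Int)) :
    Bool × List (List Bool) :=
  if hne : stack = [] then (enclosed, visited)
  else
    let cx := (stack.getLast hne).1
    let cy := (stack.getLast hne).2
    let stack' := stack.dropLast
    if cx < 0 ∨ cy < 0 ∨ cx ≥ w ∨ cy ≥ h then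
      floodLoop g w h stack' visited enclosed cells
    else if hvis : (visited.getD cy.toNat []).getD cx.toNat true = true ∨
        (g.getD cy.toNat []).getD cx.toNat 0 = 1 then
      floodLoop g w h stack' visited enclosed cells
    else
      floodLoop g w h (stack' ++ [(cx-1,cy),(cx+1,cy),(cx,cy-1),(cx,cy+1)])
        (visited.set cy.toNat ((visited.getD cy.toNat []).set cx.toNat true))
        (if cx = 0 ∨ cy = 0 ∨ cx = w - 1 ∨ cy = h - 1 then false else enclosed)
        (cells ++ [(cx, cy)])
termination_by (pvCountFalse visited, stack.length)
decreasing_by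
  · exact Prod.Lex.right _ (by have := List.length_pos_iff.mpr hne; simp [List.length_dropLast]; omega)
  · exact Prod.Lex.right _ (by have := List.length_pos_iff.mpr hne; simp [List.length_dropLast]; omega)
  · exact Prod.Lex.left _ _ (pvCountFalse_set _ _ _ (by
      rcases Bool.eq_false_or_eq_true ((visited.getD (stack.getLast hne).2.toNat []).getD (stack.getLast hne).1.toNat true) with hb | hb
      · exact absurd (Or.inl hb) hvis
      · exact hb))

def flood (g : List (List Int)) (w h : Int) (visited : List (List Bool)) (x y : Int) :
    Bool × List (List Bool) :=
  floodLoop g w h [(x, y)] visited true []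

def count_holes (subimg : List (List Int)) : Int :=
  let h : Int := PySem.List.len subimg
  let w : Int := PySem.List.len (subimg.headD [])
  let res := (PySem.List.pyRange 0 h 1).foldl (fun st y =>
      (PySem.List.pyRange 0 w 1).foldl (fun st x =>
        if (subimg.getD y.toNat []).getD x.toNat 0 = 0 ∧
            (st.1.getD y.toNat []).getD x.toNat true = false then
          let fr := flood subimg w h st.1 x y
          (fr.2, if fr.1 then st.2 + 1 else st.2)
        else st) st) (List.replicate (PySem.List.len subimg).toNat
          (List.replicate (PySem.List.len (subimg.headD [])).toNat false), (0 : Int))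
  res.2

-- ===== PORT B =====
-- B's `find`: the while loop, with fuel = dict size + 1 (a chain of strictly
-- decreasing distinct keys is shorter than the dict, so the fuel never runs out;
-- `getD i i` reads parent[i], which B only ever calls on keys).
def ufFind (p : PySem.Dict Int Int) : Nat → Int → Int
  | 0, i => i
  | fuel+1, i => if p.getD i i = i then i else ufFind p fuel (p.getD i i)

-- B's `union`
def ufUnion (p : PySem.Dict Int Int) (i j : Int) : PySem.Dict Int Int :=
  let ri := ufFind p (p.size + 1) i
  let rj := ufFind p (p.size + 1) j
  if ri < rj then p.insert rj ri
  else if rj < ri then p.insert ri rj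
  else p

-- B's double build loop over y, x
def ufBuild (g : List (List Int)) (w h : Int) : PySem.Dict Int Int :=
  (PySem.List.pyRange 0 h 1).foldl (fun p y =>
    (PySem.List.pyRange 0 w 1).foldl (fun p x =>
      if (g.getD y.toNat []).getD x.toNat 0 ≠ 1 then
        let i := y * w + x
        let p1 := p.insert i i
        let p2 := if 0 < x ∧ (g.getD y.toNat []).getD (x-1).toNat 0 ≠ 1
                  then ufUnion p1 i (i-1) else p1
        if 0 < y ∧ (g.getD (y-1).toNat []).getD x.toNat 0 ≠ 1
        then ufUnion p2 i (i-w) else p2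
      else p) p) PySem.Dict.empty

-- B's final loop over the dict keys (insertion order), then len(whites - borders);
-- divmod(i, w) is ported by floordiv/mod (exact here: the loop runs only when the
-- dict is nonempty, hence w > 0).
def count_holes_alt (subimg : List (List Int)) : Int :=
  let h : Int := PySem.List.len subimg
  let w : Int := PySem.List.len (subimg.headD [])
  let p := ufBuild subimg w h
  let wb := p.keys.foldl (fun (st : PySem.Set Int × PySem.Set Int) i =>
      let r := ufFind p (p.size + 1) i
      let y := PySem.Int.floordiv i w
      let x := PySem.Int.mod i w
      ((if (subimg.getD y.toNat []).getD x.toNat 0 = 0 then PySem.Set.add st.1 r else st.1),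
       (if x = 0 ∨ y = 0 ∨ x = w - 1 ∨ y = h - 1 then PySem.Set.add st.2 r else st.2)))
    (PySem.Set.empty, PySem.Set.empty)
  PySem.List.len (PySem.Set.diff wb.1 wb.2)

-- ===== PRECONDITION & SPEC =====
-- Pre_ excludes exactly the inputs on which the Python A raises IndexError:
-- an empty image (subimg[0]), or some row shorter than row 0 (subimg[y][x] for x < w).
def Pre_count_holes (subimg : List (List Int)) : Prop :=
  subimg ≠ [] ∧ ∀ row ∈ subimg, (subimg.headD []).length ≤ row.length
instance (subimg : List (List Int)) : Decidable (Pre_count_holes subimg) := by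
  unfold Pre_count_holes; infer_instance

def pvWitness_count_holes : List (List Int) := [[1,1,1],[1,0,1],[1,1,1]]

def Spec_count_holes (subimg : List (List Int)) (out : Int) : Prop := out = count_holes_alt subimg
instance (subimg : List (List Int)) (out : Int) : Decidable (Spec_count_holes subimg out) := by unfold Spec_count_holes; infer_instance

-- ===== CLAIM (what is proved, stated in full; the proofs are below) =====
def Claim_equal_count_holes : Prop := ∀ (subimg : List (List Int)), Dom_count_holes subimg → Pre_count_holes subimg → Spec_count_holes subimg (count_holes subimg)

-- ===== LEMMAS AND PROOFS =====
-- ===== abstract layer: cells, adjacency, reachability =====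

def pvVal (g : List (List Int)) (c : Int × Int) : Int :=
  (g.getD c.2.toNat []).getD c.1.toNat 0

def pvInb (w h : Int) (c : Int × Int) : Prop :=
  0 ≤ c.1 ∧ c.1 < w ∧ 0 ≤ c.2 ∧ c.2 < h

def pvTrav (g : List (List Int)) (w h : Int) (c : Int × Int) : Prop :=
  pvInb w h c ∧ pvVal g c ≠ 1

def pvAdj (g : List (List Int)) (w h : Int) (a b : Int × Int) : Prop :=
  pvTrav g w h a ∧ pvTrav g w h b ∧ (a.1 - b.1).natAbs + (a.2 - b.2).natAbs = 1

def pvStep (g : List (List Int)) (w h : Int) (S : Int × Int → Prop) (a b : Int × Int) : Prop :=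
  pvAdj g w h a b ∧ ¬ S b

def pvRA (g : List (List Int)) (w h : Int) (S : Int × Int → Prop) (a b : Int × Int) : Prop :=
  Relation.ReflTransGen (pvStep g w h S) a b

def pvReach (g : List (List Int)) (w h : Int) (a b : Int × Int) : Prop :=
  pvRA g w h (fun _ => False) a b

def pvBorder (w h : Int) (c : Int × Int) : Prop :=
  c.1 = 0 ∨ c.2 = 0 ∨ c.1 = w - 1 ∨ c.2 = h - 1

def pvScanLt (a b : Int × Int) : Prop := a.2 < b.2 ∨ (a.2 = b.2 ∧ a.1 < b.1)

def pvNbrs (c : Int × Int) : List (Int × Int) :=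
  [(c.1-1,c.2),(c.1+1,c.2),(c.1,c.2-1),(c.1,c.2+1)]

def pvReadV (v : List (List Bool)) (c : Int × Int) : Bool :=
  (v.getD c.2.toNat []).getD c.1.toNat true

def pvShape (w h : Int) (v : List (List Bool)) : Prop :=
  v.length = h.toNat ∧ ∀ r ∈ v, r.length = w.toNat

def pvRSet (g : List (List Int)) (w h : Int) (stack : List (Int × Int))
    (S : Int × Int → Prop) (d : Int × Int) : Prop :=
  ∃ s ∈ stack, ¬ S s ∧ pvTrav g w h s ∧ pvRA g w h S s d

def pvTSet (g : List (List Int)) (w h : Int) (F : List (Int × Int))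
    (S : Int × Int → Prop) (d : Int × Int) : Prop :=
  ∃ s ∈ F, pvTrav g w h s ∧ pvRA g w h S s d

def pvScanL (w h : Int) : List (Int × Int) :=
  (PySem.List.pyRange 0 h 1).flatMap (fun y =>
    (PySem.List.pyRange 0 w 1).map (fun x => (x, y)))

-- ===== basic facts =====

theorem pvAdj_symm {g w h} {a b : Int × Int} (hab : pvAdj g w h a b) : pvAdj g w h b a := by
  obtain ⟨h1, h2, h3⟩ := hab; exact ⟨h2, h1, by omega⟩

theorem pvAdj_mem_nbrs {g w h} {c n : Int × Int} (hcn : pvAdj g w h c n) : n ∈ pvNbrs c := by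
  obtain ⟨-, -, h3⟩ := hcn
  have : (n.1 = c.1 - 1 ∧ n.2 = c.2) ∨ (n.1 = c.1 + 1 ∧ n.2 = c.2) ∨
      (n.1 = c.1 ∧ n.2 = c.2 - 1) ∨ (n.1 = c.1 ∧ n.2 = c.2 + 1) := by omega
  have hn : n = (n.1, n.2) := rfl
  simp only [pvNbrs, List.mem_cons, List.not_mem_nil, or_false]
  rcases this with ⟨h1, h2⟩ | ⟨h1, h2⟩ | ⟨h1, h2⟩ | ⟨h1, h2⟩ <;>
    [exact .inl (by rw [hn, h1, h2]); exact .inr (.inl (by rw [hn, h1, h2]));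
     exact .inr (.inr (.inl (by rw [hn, h1, h2]))); exact .inr (.inr (.inr (by rw [hn, h1, h2])))]

theorem pvNbrs_adj {g w h} {c n : Int × Int} (hm : n ∈ pvNbrs c)
    (hc : pvTrav g w h c) (hn : pvTrav g w h n) : pvAdj g w h c n := by
  refine ⟨hc, hn, ?_⟩
  simp only [pvNbrs, List.mem_cons, List.not_mem_nil, or_false] at hm
  rcases hm with rfl | rfl | rfl | rfl <;> simp <;> omega

theorem pvRA_mono {g w h} {S T : Int × Int → Prop} (hST : ∀ x, S x → T x)
    {a b : Int × Int} (hab : pvRA g w h T a b) : pvRA g w h S a b :=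
  Relation.ReflTransGen.mono (fun _ _ hst => ⟨hst.1, fun hs => hst.2 (hST _ hs)⟩) hab

theorem pvRA_congr {g w h} {S T : Int × Int → Prop}
    (hST : ∀ c, pvTrav g w h c → (S c ↔ T c)) {a b : Int × Int} :
    pvRA g w h S a b ↔ pvRA g w h T a b := by
  constructor <;> refine fun hab => Relation.ReflTransGen.mono (fun x y hxy => ?_) hab
  · exact ⟨hxy.1, fun hy => hxy.2 ((hST y hxy.1.2.1).mpr hy)⟩
  · exact ⟨hxy.1, fun hy => hxy.2 ((hST y hxy.1.2.1).mp hy)⟩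

theorem pvRA_trav_right {g w h S} {a b : Int × Int} (hab : pvRA g w h S a b) :
    a = b ∨ pvTrav g w h b := by
  induction hab with
  | refl => exact .inl rfl
  | tail _ hstep _ => exact .inr hstep.1.2.1

theorem pvReach_symm {g w h} {a b : Int × Int} (hab : pvReach g w h a b) :
    pvReach g w h b a := by
  induction hab with
  | refl => exact .refl
  | tail _ hstep ih =>
    exact Relation.ReflTransGen.trans
      (Relation.ReflTransGen.single ⟨pvAdj_symm hstep.1, not_false⟩) ih

theorem pvReach_trans {g w h} {a b c : Int × Int} (hab : pvReach g w h a b)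
    (hbc : pvReach g w h b c) : pvReach g w h a c :=
  Relation.ReflTransGen.trans hab hbc

theorem pvRA_extract {g w h} {S C : Int × Int → Prop} {s d : Int × Int}
    (hsd : pvRA g w h S s d) :
    pvRA g w h (fun x => S x ∨ C x) s d ∨ ∃ n, C n ∧ pvRA g w h (fun x => S x ∨ C x) n d := by
  induction hsd with
  | refl => exact .inl .refl
  | tail hse hstep ih =>
    rename_i e d'
    by_cases hd : C d'
    · exact .inr ⟨d', hd, .refl⟩
    · rcases ih with h1 | ⟨n, hn, h2⟩
      · exact .inl (h1.tail ⟨hstep.1, fun hc => hc.elim hstep.2 hd⟩)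
      · exact .inr ⟨n, hn, h2.tail ⟨hstep.1, fun hc => hc.elim hstep.2 hd⟩⟩

theorem pvRA_split {g w h} {S : Int × Int → Prop} {c s d : Int × Int}
    (hsd : pvRA g w h S s d) :
    d = c ∨ (s ≠ c ∧ pvRA g w h (fun x => S x ∨ x = c) s d) ∨
      (∃ n, pvAdj g w h c n ∧ ¬ S n ∧ n ≠ c ∧ pvRA g w h (fun x => S x ∨ x = c) n d) := by
  rcases pvRA_extract (C := fun x => x = c) hsd with h1 | ⟨n, rfl, h2⟩
  · by_cases hs : s = c
    · subst hs
      rcases Relation.ReflTransGen.cases_head h1 with rfl | ⟨n, hstep, hnd⟩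
      · exact .inl rfl
      · exact .inr (.inr ⟨n, hstep.1, fun hn => hstep.2 (.inl hn),
          fun hn => hstep.2 (.inr hn), hnd⟩)
    · exact .inr (.inl ⟨hs, h1⟩)
  · rcases Relation.ReflTransGen.cases_head h2 with rfl | ⟨n, hstep, hnd⟩
    · exact .inl rfl
    · exact .inr (.inr ⟨n, hstep.1, fun hn => hstep.2 (.inl hn),
        fun hn => hstep.2 (.inr hn), hnd⟩)
-- ===== DFS (port A) correctness =====

theorem pvRSet_congr {g w h} {stack : List (Int × Int)} {S T : Int × Int → Prop}
    (hST : ∀ c, pvTrav g w h c → (S c ↔ T c)) {d : Int × Int} :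
    pvRSet g w h stack S d ↔ pvRSet g w h stack T d := by
  unfold pvRSet
  constructor <;> rintro ⟨s, hs, h1, h2, h3⟩
  · exact ⟨s, hs, fun ht => h1 ((hST s h2).mpr ht), h2, (pvRA_congr hST).mp h3⟩
  · exact ⟨s, hs, fun ht => h1 ((hST s h2).mp ht), h2, (pvRA_congr hST).mpr h3⟩

theorem pvRSet_junk {g w h} {rest : List (Int × Int)} {c : Int × Int}
    {S : Int × Int → Prop} (hc : S c ∨ ¬ pvTrav g w h c) {d : Int × Int} :
    pvRSet g w h (rest ++ [c]) S d ↔ pvRSet g w h rest S d := by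
  unfold pvRSet
  constructor
  · rintro ⟨s, hs, h1, h2, h3⟩
    rcases List.mem_append.mp hs with hs' | hs'
    · exact ⟨s, hs', h1, h2, h3⟩
    · rcases List.mem_singleton.mp hs' with rfl
      tauto
  · rintro ⟨s, hs, h1, h2, h3⟩
    exact ⟨s, List.mem_append.mpr (.inl hs), h1, h2, h3⟩

theorem pvRSet_pop {g w h} {rest : List (Int × Int)} {c : Int × Int}
    {S : Int × Int → Prop} (htrav : pvTrav g w h c) (hS : ¬ S c) {d : Int × Int} :
    pvRSet g w h (rest ++ [c]) S d ↔
      d = c ∨ pvRSet g w h (rest ++ pvNbrs c) (fun x => S x ∨ x = c) d := by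
  constructor
  · rintro ⟨s, hs, h1, h2, h3⟩
    rcases pvRA_split (c := c) h3 with rfl | ⟨hne, h4⟩ | ⟨n, hadj, hn1, hn2, h4⟩
    · exact .inl rfl
    · rcases List.mem_append.mp hs with hs' | hs'
      · exact .inr ⟨s, List.mem_append.mpr (.inl hs'), fun hx => hx.elim h1 hne, h2, h4⟩
      · exact absurd (List.mem_singleton.mp hs') hne
    · exact .inr ⟨n, List.mem_append.mpr (.inr (pvAdj_mem_nbrs hadj)),
        fun hx => hx.elim hn1 hn2, hadj.2.1, h4⟩
  · rintro (rfl | ⟨s, hs, h1, h2, h3⟩)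
    · exact ⟨d, List.mem_append.mpr (.inr (List.mem_singleton.mpr rfl)), hS, htrav, .refl⟩
    · have hmono : pvRA g w h S s d := pvRA_mono (fun x hx => Or.inl hx) h3
      rcases List.mem_append.mp hs with hs' | hs'
      · exact ⟨s, List.mem_append.mpr (.inl hs'), fun hx => h1 (.inl hx), h2, hmono⟩
      · refine ⟨c, List.mem_append.mpr (.inr (List.mem_singleton.mpr rfl)), hS, htrav, ?_⟩
        exact Relation.ReflTransGen.head ⟨pvNbrs_adj hs' htrav h2, fun hx => h1 (.inl hx)⟩ hmono

theorem pvGetD_set_self {α : Type} (l : List α) (i : Nat) (a d : α) (h : i < l.length) :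
    (l.set i a).getD i d = a := by
  rw [List.getD_eq_getElem _ d (by simpa using h)]
  simp [List.getElem_set_self]

theorem pvGetD_set_ne {α : Type} (l : List α) (i j : Nat) (a d : α) (h : j ≠ i) :
    (l.set i a).getD j d = l.getD j d := by
  by_cases hj : j < l.length
  · rw [List.getD_eq_getElem _ d (by simpa using hj), List.getD_eq_getElem _ d hj]
    simp [List.getElem_set_ne (by omega : i ≠ j)]
  · rw [List.getD_eq_default _ d (by simpa using not_lt.mp hj),
      List.getD_eq_default _ d (not_lt.mp hj)]

theorem pvReadV_false_inrange {v : List (List Bool)} {c : Int × Int}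
    (hf : pvReadV v c = false) :
    c.2.toNat < v.length ∧ c.1.toNat < (v.getD c.2.toNat []).length := by
  unfold pvReadV at hf
  have h2 : c.2.toNat < v.length := by
    by_contra hy
    rw [List.getD_eq_default _ [] (not_lt.mp hy)] at hf
    simp at hf
  refine ⟨h2, ?_⟩
  by_contra hx
  rw [List.getD_eq_default _ true (not_lt.mp hx)] at hf
  simp at hf

-- writing cell c: pointwise description of the updated visited matrix
theorem pvReadV_set {v : List (List Bool)} {c : Int × Int}
    (hf : pvReadV v c = false) (c' : Int × Int) :
    pvReadV (v.set c.2.toNat ((v.getD c.2.toNat []).set c.1.toNat true)) c'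
      = if c'.1.toNat = c.1.toNat ∧ c'.2.toNat = c.2.toNat then true else pvReadV v c' := by
  obtain ⟨hy, hx⟩ := pvReadV_false_inrange hf
  unfold pvReadV
  by_cases h2 : c'.2.toNat = c.2.toNat
  · rw [h2, pvGetD_set_self _ _ _ _ hy]
    by_cases h1 : c'.1.toNat = c.1.toNat
    · rw [h1, pvGetD_set_self _ _ _ _ hx]
      simp [h1, h2]
    · rw [pvGetD_set_ne _ _ _ _ _ h1]
      simp [h1, h2]
  · rw [pvGetD_set_ne _ _ _ _ _ h2]
    simp [h2]

theorem pvShape_set {w h : Int} {v : List (List Bool)} (hsh : pvShape w h v)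
    (i j : Nat) :
    pvShape w h (v.set i ((v.getD i []).set j true)) := by
  obtain ⟨hlen, hrows⟩ := hsh
  by_cases hi : i < v.length
  · refine ⟨by simpa using hlen, fun r hr => ?_⟩
    rcases List.mem_or_eq_of_mem_set hr with hr' | rfl
    · exact hrows r hr'
    · rw [List.length_set, List.getD_eq_getElem _ [] hi]
      exact hrows _ (List.getElem_mem hi)
  · rw [List.set_eq_of_length_le (not_lt.mp hi)]
    exact ⟨hlen, hrows⟩

theorem floodLoop_spec (g : List (List Int)) (w h : Int)
    (stack : List (Int × Int)) (v : List (List Bool)) (enc : Bool)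
    (cells : List (Int × Int)) : pvShape w h v →
      (((floodLoop g w h stack v enc cells).1 = true ↔
          (enc = true ∧ ∀ d, pvRSet g w h stack (fun x => pvReadV v x = true) d →
            ¬ pvBorder w h d))
        ∧ pvShape w h (floodLoop g w h stack v enc cells).2
        ∧ (∀ c, pvInb w h c →
            (pvReadV (floodLoop g w h stack v enc cells).2 c = true ↔
              (pvReadV v c = true ∨ pvRSet g w h stack (fun x => pvReadV v x = true) c)))) := by
  induction stack, v, enc, cells using floodLoop.induct g w h with
  | case1 v enc cells =>
    intro hsh
    rw [floodLoop]
    simp only [dif_pos rfl]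
    have hempty : ∀ d, ¬ pvRSet g w h [] (fun x => pvReadV v x = true) d := by
      rintro d ⟨s, hs, -⟩; simp at hs
    exact ⟨⟨fun he => ⟨he, fun d hd => absurd hd (hempty d)⟩, fun hp => hp.1⟩, hsh,
      fun c _ => ⟨fun hr => .inl hr, fun hr => hr.elim id (fun hd => absurd hd (hempty c))⟩⟩
  | case2 stack v enc cells hne cx cy stack' hoob ih =>
    intro hsh
    have hoob' : (stack.getLast hne).1 < 0 ∨ (stack.getLast hne).2 < 0 ∨
        (stack.getLast hne).1 ≥ w ∨ (stack.getLast hne).2 ≥ h := hoob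
    rw [floodLoop]
    simp only [dif_neg hne, if_pos hoob']
    have hstack : stack.dropLast ++ [stack.getLast hne] = stack :=
      List.dropLast_concat_getLast hne
    have hjunk : ∀ d, pvRSet g w h stack (fun x => pvReadV v x = true) d ↔
        pvRSet g w h stack.dropLast (fun x => pvReadV v x = true) d := by
      intro d
      conv_lhs => rw [← hstack]
      refine pvRSet_junk (.inr ?_)
      rintro ⟨⟨ha, hb, hc, hd⟩, -⟩
      rcases hoob' with h' | h' | h' | h' <;> omega
    obtain ⟨ih1, ih2, ih3⟩ := ih hsh
    replace ih1 : (floodLoop g w h stack.dropLast v enc cells).1 = true ↔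
        (enc = true ∧ ∀ d, pvRSet g w h stack.dropLast (fun x => pvReadV v x = true) d →
          ¬ pvBorder w h d) := ih1
    replace ih2 : pvShape w h (floodLoop g w h stack.dropLast v enc cells).2 := ih2
    replace ih3 : ∀ c, pvInb w h c →
        (pvReadV (floodLoop g w h stack.dropLast v enc cells).2 c = true ↔
          (pvReadV v c = true ∨ pvRSet g w h stack.dropLast (fun x => pvReadV v x = true) c)) := ih3
    exact ⟨by rw [ih1]; simp only [hjunk], ih2,
      fun c hc => by rw [ih3 c hc]; simp only [hjunk]⟩
  | case3 stack v enc cells hne cx cy stack' hoob hvb ih =>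
    intro hsh
    have hoob' : ¬ ((stack.getLast hne).1 < 0 ∨ (stack.getLast hne).2 < 0 ∨
        (stack.getLast hne).1 ≥ w ∨ (stack.getLast hne).2 ≥ h) := hoob
    have hvb' : (v.getD (stack.getLast hne).2.toNat []).getD (stack.getLast hne).1.toNat true = true ∨
        (g.getD (stack.getLast hne).2.toNat []).getD (stack.getLast hne).1.toNat 0 = 1 := hvb
    rw [floodLoop]
    simp only [dif_neg hne, if_neg hoob', dif_pos hvb']
    have hstack : stack.dropLast ++ [stack.getLast hne] = stack :=
      List.dropLast_concat_getLast hne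
    have hjunk : ∀ d, pvRSet g w h stack (fun x => pvReadV v x = true) d ↔
        pvRSet g w h stack.dropLast (fun x => pvReadV v x = true) d := by
      intro d
      conv_lhs => rw [← hstack]
      rcases hvb' with hv' | hv'
      · exact pvRSet_junk (.inl hv')
      · exact pvRSet_junk (.inr (fun htrav => htrav.2 hv'))
    obtain ⟨ih1, ih2, ih3⟩ := ih hsh
    replace ih1 : (floodLoop g w h stack.dropLast v enc cells).1 = true ↔
        (enc = true ∧ ∀ d, pvRSet g w h stack.dropLast (fun x => pvReadV v x = true) d →
          ¬ pvBorder w h d) := ih1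
    replace ih2 : pvShape w h (floodLoop g w h stack.dropLast v enc cells).2 := ih2
    replace ih3 : ∀ c, pvInb w h c →
        (pvReadV (floodLoop g w h stack.dropLast v enc cells).2 c = true ↔
          (pvReadV v c = true ∨ pvRSet g w h stack.dropLast (fun x => pvReadV v x = true) c)) := ih3
    exact ⟨by rw [ih1]; simp only [hjunk], ih2,
      fun c hc => by rw [ih3 c hc]; simp only [hjunk]⟩
  | case4 stack v enc cells hne cx cy stack' hoob hvb ih =>
    intro hsh
    have hoob' : ¬ ((stack.getLast hne).1 < 0 ∨ (stack.getLast hne).2 < 0 ∨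
        (stack.getLast hne).1 ≥ w ∨ (stack.getLast hne).2 ≥ h) := hoob
    have hvb' : ¬ ((v.getD (stack.getLast hne).2.toNat []).getD (stack.getLast hne).1.toNat true = true ∨
        (g.getD (stack.getLast hne).2.toNat []).getD (stack.getLast hne).1.toNat 0 = 1) := hvb
    rw [floodLoop]
    simp only [dif_neg hne, if_neg hoob', dif_neg hvb']
    set c : Int × Int := stack.getLast hne with hc
    have hcpair : ((stack.getLast hne).1, (stack.getLast hne).2) = c := rfl
    have hinb : pvInb w h c := by
      push_neg at hoob'
      exact ⟨by omega, by omega, by omega, by omega⟩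
    have hvb2 : ¬ (pvReadV v c = true ∨ pvVal g c = 1) := hvb'
    have hS : pvReadV v c = false := by
      rcases Bool.eq_false_or_eq_true (pvReadV v c) with hb | hb
      · exact absurd (Or.inl hb) hvb2
      · exact hb
    have hval : pvVal g c ≠ 1 := fun hv'' => hvb2 (Or.inr hv'')
    have htrav : pvTrav g w h c := ⟨hinb, hval⟩
    have hstack : stack.dropLast ++ [c] = stack := List.dropLast_concat_getLast hne
    set v' : List (List Bool) := v.set c.2.toNat ((v.getD c.2.toNat []).set c.1.toNat true) with hv'
    have hsh' : pvShape w h v' := pvShape_set hsh _ _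
    have hread' : ∀ x, pvReadV v' x =
        if x.1.toNat = c.1.toNat ∧ x.2.toNat = c.2.toNat then true else pvReadV v x :=
      pvReadV_set hS
    have hSc : ∀ x, pvTrav g w h x →
        (pvReadV v' x = true ↔ (pvReadV v x = true ∨ x = c)) := by
      intro x hx
      rw [hread' x]
      by_cases hxc : x = c
      · subst hxc; simp
      · have : ¬ (x.1.toNat = c.1.toNat ∧ x.2.toNat = c.2.toNat) := by
          rintro ⟨h1', h2'⟩
          obtain ⟨hx1, -, hx2, -⟩ := hx.1
          obtain ⟨hc1, -, hc2, -⟩ := hinb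
          exact hxc (Prod.ext (by omega) (by omega))
        simp [this, hxc]
    have hpop : ∀ d, pvRSet g w h stack (fun x => pvReadV v x = true) d ↔
        (d = c ∨ pvRSet g w h (stack.dropLast ++ pvNbrs c)
          (fun x => pvReadV v x = true ∨ x = c) d) := by
      intro d
      conv_lhs => rw [← hstack]
      exact pvRSet_pop htrav (by simp [hS])
    have hcongr : ∀ d, pvRSet g w h (stack.dropLast ++ pvNbrs c)
        (fun x => pvReadV v' x = true) d ↔
        pvRSet g w h (stack.dropLast ++ pvNbrs c)
          (fun x => pvReadV v x = true ∨ x = c) d := by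
      intro d; exact pvRSet_congr hSc
    have hcsrc : pvRSet g w h stack (fun x => pvReadV v x = true) c := by
      rw [← hstack]
      exact ⟨c, List.mem_append.mpr (.inr (List.mem_singleton.mpr rfl)),
        by simp [hS], htrav, .refl⟩
    obtain ⟨ih1, ih2, ih3⟩ := ih hsh'
    replace ih1 : (floodLoop g w h (stack.dropLast ++ pvNbrs c) v'
        (if c.1 = 0 ∨ c.2 = 0 ∨ c.1 = w - 1 ∨ c.2 = h - 1 then false else enc)
        (cells ++ [c])).1 = true ↔
        ((if c.1 = 0 ∨ c.2 = 0 ∨ c.1 = w - 1 ∨ c.2 = h - 1 then false else enc) = true ∧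
          ∀ d, pvRSet g w h (stack.dropLast ++ pvNbrs c)
            (fun x => pvReadV v' x = true) d → ¬ pvBorder w h d) := ih1
    replace ih2 : pvShape w h (floodLoop g w h (stack.dropLast ++ pvNbrs c) v'
        (if c.1 = 0 ∨ c.2 = 0 ∨ c.1 = w - 1 ∨ c.2 = h - 1 then false else enc)
        (cells ++ [c])).2 := ih2
    replace ih3 : ∀ x, pvInb w h x →
        (pvReadV (floodLoop g w h (stack.dropLast ++ pvNbrs c) v'
          (if c.1 = 0 ∨ c.2 = 0 ∨ c.1 = w - 1 ∨ c.2 = h - 1 then false else enc)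
          (cells ++ [c])).2 x = true ↔
          (pvReadV v' x = true ∨ pvRSet g w h (stack.dropLast ++ pvNbrs c)
            (fun y => pvReadV v' y = true) x)) := ih3
    rw [show [(c.1 - 1, c.2), (c.1 + 1, c.2), (c.1, c.2 - 1), (c.1, c.2 + 1)] = pvNbrs c
        from rfl,
      show ((c.1, c.2) : Int × Int) = c from rfl]
    refine ⟨?_, ih2, ?_⟩
    · rw [ih1]
      by_cases hb : c.1 = 0 ∨ c.2 = 0 ∨ c.1 = w - 1 ∨ c.2 = h - 1
      · simp only [if_pos hb]
        constructor
        · rintro ⟨hfalse, -⟩; exact absurd hfalse (by simp)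
        · rintro ⟨-, hall⟩
          exact absurd hb (hall c hcsrc)
      · simp only [if_neg hb]
        constructor
        · rintro ⟨henc, hall⟩
          refine ⟨henc, fun d hd => ?_⟩
          rcases (hpop d).mp hd with rfl | hd'
          · exact hb
          · exact hall d ((hcongr d).mpr hd')
        · rintro ⟨henc, hall⟩
          refine ⟨henc, fun d hd => ?_⟩
          exact hall d ((hpop d).mpr (.inr ((hcongr d).mp hd)))
    · intro x hx
      rw [ih3 x hx]
      have hvx : pvReadV v' x = true ↔ (pvReadV v x = true ∨ x = c) := by
        rw [hread' x]
        by_cases hxc : x = c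
        · subst hxc; simp
        · have : ¬ (x.1.toNat = c.1.toNat ∧ x.2.toNat = c.2.toNat) := by
            rintro ⟨h1', h2'⟩
            obtain ⟨hx1, -, hx2, -⟩ := hx
            obtain ⟨hc1, -, hc2, -⟩ := hinb
            exact hxc (Prod.ext (by omega) (by omega))
          simp [this, hxc]
      rw [hvx]
      constructor
      · rintro ((hr | rfl) | hd)
        · exact .inl hr
        · exact .inr hcsrc
        · exact .inr ((hpop x).mpr (.inr ((hcongr x).mp hd)))
      · rintro (hr | hd)
        · exact .inl (.inl hr)
        · rcases (hpop x).mp hd with rfl | hd'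
          · exact .inl (.inr rfl)
          · exact .inr ((hcongr x).mpr hd')
-- avoiding a union-of-components set does not restrict paths that start outside it
theorem pvReach_pres {g w h} {S : Int × Int → Prop}
    (hcl : ∀ a b, pvAdj g w h a b → (S a ↔ S b)) {a b : Int × Int}
    (hab : pvReach g w h a b) : S a ↔ S b := by
  induction hab with
  | refl => exact Iff.rfl
  | tail _ hstep ih => exact ih.trans (hcl _ _ hstep.1)

theorem pvReach_toRA {g w h} {S : Int × Int → Prop}
    (hcl : ∀ a b, pvAdj g w h a b → (S a ↔ S b)) {a b : Int × Int}
    (ha : ¬ S a) (hab : pvReach g w h a b) : pvRA g w h S a b := by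
  induction hab with
  | refl => exact .refl
  | tail hae hstep ih =>
    refine ih.tail ⟨hstep.1, fun hd => ?_⟩
    exact ha (((pvReach_pres hcl (hae.tail hstep)).mpr hd))

theorem pvRA_toReach {g w h} {S : Int × Int → Prop} {a b : Int × Int}
    (hab : pvRA g w h S a b) : pvReach g w h a b :=
  pvRA_mono (fun _ hx => hx.elim) hab

-- flood from an unvisited traversable cell of a component-closed visited set
-- explores exactly the component of that cell
theorem pvRSet_single {g w h} {S : Int × Int → Prop} {c : Int × Int}
    (hcl : ∀ a b, pvAdj g w h a b → (S a ↔ S b))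
    (htrav : pvTrav g w h c) (hc : ¬ S c) (d : Int × Int) :
    pvRSet g w h [c] S d ↔ pvReach g w h c d := by
  constructor
  · rintro ⟨s, hs, -, -, h3⟩
    rcases List.mem_singleton.mp hs with rfl
    exact pvRA_toReach h3
  · intro hr
    exact ⟨c, List.mem_singleton.mpr rfl, hc, htrav, pvReach_toRA hcl hc hr⟩

theorem flood_spec {g : List (List Int)} {w h : Int} {v : List (List Bool)}
    {c : Int × Int} (hsh : pvShape w h v)
    (hcl : ∀ a b, pvAdj g w h a b → (pvReadV v a = true ↔ pvReadV v b = true))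
    (htrav : pvTrav g w h c) (hc : pvReadV v c = false) :
    (((flood g w h v c.1 c.2).1 = true ↔ ∀ d, pvReach g w h c d → ¬ pvBorder w h d)
      ∧ pvShape w h (flood g w h v c.1 c.2).2
      ∧ (∀ x, pvInb w h x →
          (pvReadV (flood g w h v c.1 c.2).2 x = true ↔
            (pvReadV v x = true ∨ pvReach g w h c x)))) := by
  have hc' : ¬ pvReadV v c = true := by simp [hc]
  obtain ⟨f1, f2, f3⟩ := floodLoop_spec g w h [(c.1, c.2)] v true [] hsh
  rw [show ((c.1, c.2) : Int × Int) = c from rfl] at f1 f2 f3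
  have hsingle := pvRSet_single (S := fun x => pvReadV v x = true) hcl htrav hc'
  refine ⟨?_, f2, ?_⟩
  · rw [show flood g w h v c.1 c.2 = floodLoop g w h [(c.1, c.2)] v true [] from rfl,
      show ((c.1, c.2) : Int × Int) = c from rfl, f1]
    simp only [hsingle]
    tauto
  · intro x hx
    rw [show flood g w h v c.1 c.2 = floodLoop g w h [(c.1, c.2)] v true [] from rfl,
      show ((c.1, c.2) : Int × Int) = c from rfl, f3 x hx]
    simp only [hsingle]
-- ===== proof gadget: a per-cell BFS `probe` characterising "c's component is enclosed
-- and c is its scan-order-first white cell"; it bridges A's flood count and B's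
-- union-find count (it is not part of either port) =====

def pvGrid (w h : Int) : Finset (Int × Int) :=
  @Finset.Icc Int _ Int.instLocallyFiniteOrder 0 (w-1) ×ˢ @Finset.Icc Int _ Int.instLocallyFiniteOrder 0 (h-1)

def pvUnseen (w h : Int) (seen : List (Int × Int)) : Nat :=
  ((pvGrid w h).filter (fun c => ¬ c ∈ seen)).card

-- one neighbour candidate of the BFS: enqueue it iff in bounds, unseen, not black
def probeNbr (g : List (List Int)) (w h : Int)
    (st : PySem.Set (Int × Int) × List (Int × Int)) (n : Int × Int) :
    PySem.Set (Int × Int) × List (Int × Int) :=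
  if 0 ≤ n.1 ∧ n.1 < w ∧ 0 ≤ n.2 ∧ n.2 < h ∧ ¬ n ∈ st.1 ∧
      (g.getD n.2.toNat []).getD n.1.toNat 0 ≠ 1 then
    (PySem.Set.add st.1 n, st.2 ++ [n])
  else st

-- processing one frontier cell: flag updates, then its four neighbours
def probeCell (g : List (List Int)) (w h x0 y0 : Int)
    (st : Bool × Bool × PySem.Set (Int × Int) × List (Int × Int)) (c : Int × Int) :
    Bool × Bool × PySem.Set (Int × Int) × List (Int × Int) :=
  let enc := if c.1 = 0 ∨ c.2 = 0 ∨ c.1 = w - 1 ∨ c.2 = h - 1 then false else st.1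
  let fst := if (g.getD c.2.toNat []).getD c.1.toNat 0 = 0 ∧
      (c.2 < y0 ∨ (c.2 = y0 ∧ c.1 < x0)) then false else st.2.1
  let sn := [(c.1-1,c.2),(c.1+1,c.2),(c.1,c.2-1),(c.1,c.2+1)].foldl
      (probeNbr g w h) (st.2.2.1, st.2.2.2)
  (enc, fst, sn.1, sn.2)

def probeLevel (g : List (List Int)) (w h x0 y0 : Int) (frontier : List (Int × Int))
    (st : Bool × Bool × PySem.Set (Int × Int) × List (Int × Int)) :
    Bool × Bool × PySem.Set (Int × Int) × List (Int × Int) :=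
  frontier.foldl (probeCell g w h x0 y0) st

theorem probeNbr_measure (g : List (List Int)) (w h : Int)
    (st : PySem.Set (Int × Int) × List (Int × Int)) (n : Int × Int) :
    pvUnseen w h (probeNbr g w h st n).1 + (probeNbr g w h st n).2.length
      = pvUnseen w h st.1 + st.2.length := by
  unfold probeNbr
  split_ifs with hcond
  · obtain ⟨h1, h2, h3, h4, h5, h6⟩ := hcond
    have hmem : n ∈ (pvGrid w h).filter (fun c => ¬ c ∈ st.1) := by
      simp [pvGrid, Finset.mem_product, Finset.mem_Icc, h5]
      omega
    have hset : PySem.Set.add st.1 n = st.1 ++ [n] := PySem.Set.add_of_not_mem h5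
    have hfilter : (pvGrid w h).filter (fun c => ¬ c ∈ PySem.Set.add st.1 n)
        = ((pvGrid w h).filter (fun c => ¬ c ∈ st.1)).erase n := by
      ext c
      simp [hset, Finset.mem_erase, Finset.mem_filter]
      tauto
    have hcard := Finset.card_erase_of_mem hmem
    simp only [pvUnseen, hfilter, hcard, List.length_append, List.length_cons, List.length_nil]
    have : 0 < ((pvGrid w h).filter (fun c => ¬ c ∈ st.1)).card :=
      Finset.card_pos.mpr ⟨n, hmem⟩
    omega
  · rfl

theorem probeNbrFold_measure (g : List (List Int)) (w h : Int)
    (l : List (Int × Int)) (p : PySem.Set (Int × Int) × List (Int × Int)) :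
    pvUnseen w h (l.foldl (probeNbr g w h) p).1 + (l.foldl (probeNbr g w h) p).2.length
      = pvUnseen w h p.1 + p.2.length := by
  induction l generalizing p with
  | nil => rfl
  | cons a t iht => rw [List.foldl_cons, iht, probeNbr_measure]

theorem probeLevel_measure (g : List (List Int)) (w h x0 y0 : Int)
    (frontier : List (Int × Int))
    (st : Bool × Bool × PySem.Set (Int × Int) × List (Int × Int)) :
    pvUnseen w h (probeLevel g w h x0 y0 frontier st).2.2.1
        + (probeLevel g w h x0 y0 frontier st).2.2.2.length
      = pvUnseen w h st.2.2.1 + st.2.2.2.length := by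
  induction frontier generalizing st with
  | nil => rfl
  | cons c rest ih =>
    rw [probeLevel, List.foldl_cons, ← probeLevel]
    rw [ih]
    simp only [probeCell]
    exact probeNbrFold_measure g w h _ (st.2.2.1, st.2.2.2)

def probeLoop (g : List (List Int)) (w h x0 y0 : Int)
    (seen : PySem.Set (Int × Int)) (frontier : List (Int × Int))
    (enclosed first : Bool) : Bool :=
  if frontier = [] then enclosed && first
  else
    let r := probeLevel g w h x0 y0 frontier (enclosed, first, seen, [])
    probeLoop g w h x0 y0 r.2.2.1 r.2.2.2 r.1 r.2.1
termination_by pvUnseen w h seen + frontier.length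
decreasing_by
  have hm := probeLevel_measure g w h x0 y0 frontier (enclosed, first, seen, [])
  simp only [List.length_nil, Nat.add_zero] at hm
  have : frontier.length ≠ 0 := by
    simpa [List.length_eq_zero_iff] using ‹¬ frontier = []›
  omega

def probe (g : List (List Int)) (w h x y : Int) : Bool :=
  probeLoop g w h x y (PySem.Set.ofList [(x, y)]) [(x, y)] true true

theorem probeNbrFold_mem (g : List (List Int)) (w h : Int) (L : List (Int × Int))
    (p : PySem.Set (Int × Int) × List (Int × Int)) :
    (∀ d, (d ∈ (L.foldl (probeNbr g w h) p).1 ↔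
        d ∈ p.1 ∨ (pvTrav g w h d ∧ d ∈ L)))
    ∧ (∀ d, (d ∈ (L.foldl (probeNbr g w h) p).2 ↔
        d ∈ p.2 ∨ (¬ d ∈ p.1 ∧ pvTrav g w h d ∧ d ∈ L))) := by
  induction L generalizing p with
  | nil => exact ⟨fun d => by simp, fun d => by simp⟩
  | cons a t ih =>
    rw [List.foldl_cons]
    obtain ⟨ih1, ih2⟩ := ih (probeNbr g w h p a)
    have hguard : (0 ≤ a.1 ∧ a.1 < w ∧ 0 ≤ a.2 ∧ a.2 < h ∧ ¬ a ∈ p.1 ∧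
        (g.getD a.2.toNat []).getD a.1.toNat 0 ≠ 1) ↔ (pvTrav g w h a ∧ ¬ a ∈ p.1) := by
      unfold pvTrav pvInb pvVal; tauto
    by_cases hg : pvTrav g w h a ∧ ¬ a ∈ p.1
    · have hnbr : probeNbr g w h p a = (PySem.Set.add p.1 a, p.2 ++ [a]) := by
        unfold probeNbr; rw [if_pos (hguard.mpr hg)]
      rw [hnbr] at ih1 ih2 ⊢
      constructor
      · intro d
        rw [ih1 d]
        simp only [PySem.Set.mem_add, List.mem_cons]
        by_cases hda : d = a
        · subst hda; tauto
        · tauto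
      · intro d
        rw [ih2 d]
        simp only [PySem.Set.mem_add, List.mem_append, List.mem_singleton, List.mem_cons]
        by_cases hda : d = a
        · subst hda; tauto
        · tauto
    · have hnbr : probeNbr g w h p a = p := by
        unfold probeNbr
        rw [if_neg (fun hc => hg (hguard.mp hc))]
      rw [hnbr] at ih1 ih2 ⊢
      constructor
      · intro d
        rw [ih1 d]
        simp only [List.mem_cons]
        by_cases hda : d = a
        · subst hda; tauto
        · tauto
      · intro d
        rw [ih2 d]
        simp only [List.mem_cons]
        by_cases hda : d = a
        · subst hda; tauto
        · tauto

theorem probeCell_spec (g : List (List Int)) (w h x0 y0 : Int)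
    (st : Bool × Bool × PySem.Set (Int × Int) × List (Int × Int)) (c : Int × Int) :
    ((probeCell g w h x0 y0 st c).1 = true ↔ (st.1 = true ∧ ¬ pvBorder w h c))
    ∧ ((probeCell g w h x0 y0 st c).2.1 = true ↔
        (st.2.1 = true ∧ ¬ (pvVal g c = 0 ∧ pvScanLt c (x0, y0))))
    ∧ (∀ d, (d ∈ (probeCell g w h x0 y0 st c).2.2.1 ↔
        d ∈ st.2.2.1 ∨ (pvTrav g w h d ∧ d ∈ pvNbrs c)))
    ∧ (∀ d, (d ∈ (probeCell g w h x0 y0 st c).2.2.2 ↔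
        d ∈ st.2.2.2 ∨ (¬ d ∈ st.2.2.1 ∧ pvTrav g w h d ∧ d ∈ pvNbrs c))) := by
  obtain ⟨hf1, hf2⟩ := probeNbrFold_mem g w h
    [(c.1-1,c.2),(c.1+1,c.2),(c.1,c.2-1),(c.1,c.2+1)] (st.2.2.1, st.2.2.2)
  refine ⟨?_, ?_, fun d => ?_, fun d => ?_⟩
  · unfold probeCell pvBorder
    by_cases hb : c.1 = 0 ∨ c.2 = 0 ∨ c.1 = w - 1 ∨ c.2 = h - 1
    · simp [hb]
    · simp [hb]
  · unfold probeCell pvVal pvScanLt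
    by_cases hz : (g.getD c.2.toNat []).getD c.1.toNat 0 = 0 ∧
        (c.2 < y0 ∨ (c.2 = y0 ∧ c.1 < x0))
    · simp only [if_pos hz]
      exact ⟨fun hf => absurd hf (by simp), fun hp => absurd hz hp.2⟩
    · simp only [if_neg hz]
      tauto
  · exact hf1 d
  · exact hf2 d

theorem probeLevel_spec (g : List (List Int)) (w h x0 y0 : Int)
    (F : List (Int × Int)) :
    ∀ (st : Bool × Bool × PySem.Set (Int × Int) × List (Int × Int)),
    ((probeLevel g w h x0 y0 F st).1 = true ↔
        (st.1 = true ∧ ∀ f ∈ F, ¬ pvBorder w h f))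
    ∧ ((probeLevel g w h x0 y0 F st).2.1 = true ↔
        (st.2.1 = true ∧ ∀ f ∈ F, ¬ (pvVal g f = 0 ∧ pvScanLt f (x0, y0))))
    ∧ (∀ d, (d ∈ (probeLevel g w h x0 y0 F st).2.2.1 ↔
        d ∈ st.2.2.1 ∨ (pvTrav g w h d ∧ ∃ f ∈ F, d ∈ pvNbrs f)))
    ∧ (∀ d, (d ∈ (probeLevel g w h x0 y0 F st).2.2.2 ↔
        d ∈ st.2.2.2 ∨ (¬ d ∈ st.2.2.1 ∧ pvTrav g w h d ∧ ∃ f ∈ F, d ∈ pvNbrs f))) := by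
  induction F with
  | nil =>
    intro st
    exact ⟨by simp [probeLevel], by simp [probeLevel], fun d => by simp [probeLevel],
      fun d => by simp [probeLevel]⟩
  | cons f t ih =>
    intro st
    rw [probeLevel, List.foldl_cons, ← probeLevel]
    obtain ⟨ih1, ih2, ih3, ih4⟩ := ih (probeCell g w h x0 y0 st f)
    obtain ⟨hc1, hc2, hc3, hc4⟩ := probeCell_spec g w h x0 y0 st f
    refine ⟨?_, ?_, fun d => ?_, fun d => ?_⟩
    · rw [ih1, hc1]
      simp only [List.mem_cons]
      constructor
      · rintro ⟨⟨h1, h2⟩, h3⟩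
        exact ⟨h1, fun x hx => hx.elim (fun he => he ▸ h2) (h3 x)⟩
      · rintro ⟨h1, h2⟩
        exact ⟨⟨h1, h2 f (.inl rfl)⟩, fun x hx => h2 x (.inr hx)⟩
    · rw [ih2, hc2]
      simp only [List.mem_cons]
      constructor
      · rintro ⟨⟨h1, h2⟩, h3⟩
        exact ⟨h1, fun x hx => hx.elim (fun he => he ▸ h2) (h3 x)⟩
      · rintro ⟨h1, h2⟩
        exact ⟨⟨h1, h2 f (.inl rfl)⟩, fun x hx => h2 x (.inr hx)⟩
    · rw [ih3 d]
      simp only [hc3 d, List.mem_cons]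
      constructor
      · rintro ((hd | ⟨ht, hn⟩) | ⟨ht, x, hx, hn⟩)
        · exact .inl hd
        · exact .inr ⟨ht, f, .inl rfl, hn⟩
        · exact .inr ⟨ht, x, .inr hx, hn⟩
      · rintro (hd | ⟨ht, x, (rfl | hx), hn⟩)
        · exact .inl (.inl hd)
        · exact .inl (.inr ⟨ht, hn⟩)
        · exact .inr ⟨ht, x, hx, hn⟩
    · rw [ih4 d]
      simp only [hc4 d, hc3 d, List.mem_cons]
      constructor
      · rintro ((hd | ⟨hs, ht, hn⟩) | ⟨hs, ht, x, hx, hn⟩)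
        · exact .inl hd
        · exact .inr ⟨hs, ht, f, .inl rfl, hn⟩
        · exact .inr ⟨fun hmem => hs (.inl hmem), ht, x, .inr hx, hn⟩
      · rintro (hd | ⟨hs, ht, x, (rfl | hx), hn⟩)
        · exact .inl (.inl hd)
        · exact .inl (.inr ⟨hs, ht, hn⟩)
        · by_cases hz : d ∈ st.2.2.1 ∨ (pvTrav g w h d ∧ d ∈ pvNbrs f)
          · rcases hz with hz | ⟨ht', hn'⟩
            · exact absurd hz hs
            · exact .inl (.inr ⟨hs, ht', hn'⟩)
          · exact .inr ⟨hz, ht, x, hx, hn⟩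
theorem pvTSet_congr {g w h} {F : List (Int × Int)} {S T : Int × Int → Prop}
    (hST : ∀ c, pvTrav g w h c → (S c ↔ T c)) {d : Int × Int} :
    pvTSet g w h F S d ↔ pvTSet g w h F T d := by
  unfold pvTSet
  constructor <;> rintro ⟨s, hs, h2, h3⟩
  · exact ⟨s, hs, h2, (pvRA_congr hST).mp h3⟩
  · exact ⟨s, hs, h2, (pvRA_congr hST).mpr h3⟩

theorem pvTSet_level {g w h} {F F' : List (Int × Int)} {Q : Int × Int → Prop}
    (hF : ∀ s ∈ F, pvTrav g w h s)
    (hnxt : ∀ d, d ∈ F' ↔ (¬ Q d ∧ pvTrav g w h d ∧ ∃ f ∈ F, pvAdj g w h f d))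
    (d : Int × Int) :
    pvTSet g w h F Q d ↔ (d ∈ F ∨ pvTSet g w h F' (fun x => Q x ∨ x ∈ F') d) := by
  constructor
  · rintro ⟨s, hsF, htrav, hra⟩
    rcases pvRA_extract (C := fun x => x ∈ F') hra with h1 | ⟨n, hnF', h2⟩
    · rcases Relation.ReflTransGen.cases_head h1 with rfl | ⟨n, hstep, -⟩
      · exact .inl hsF
      · exfalso
        refine hstep.2 (.inr ((hnxt n).mpr ⟨fun hq => hstep.2 (.inl hq), hstep.1.2.1,
          s, hsF, hstep.1⟩))
    · exact .inr ⟨n, hnF', ((hnxt n).mp hnF').2.1, h2⟩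
  · rintro (hdF | ⟨s, hsF', htrav, hra⟩)
    · exact ⟨d, hdF, hF d hdF, .refl⟩
    · obtain ⟨hQs, htrs, f, hfF, hadj⟩ := (hnxt s).mp hsF'
      exact ⟨f, hfF, hF f hfF,
        Relation.ReflTransGen.head ⟨hadj, hQs⟩ (pvRA_mono (fun x hx => .inl hx) hra)⟩

theorem probeLoop_spec (g : List (List Int)) (w h x0 y0 : Int) :
    ∀ (seen : PySem.Set (Int × Int)) (F : List (Int × Int)) (enc fst : Bool),
      (∀ s ∈ F, pvTrav g w h s) →
      (probeLoop g w h x0 y0 seen F enc fst = true ↔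
        ((enc = true ∧ ∀ d, pvTSet g w h F (fun x => x ∈ seen) d → ¬ pvBorder w h d) ∧
         (fst = true ∧ ∀ d, pvTSet g w h F (fun x => x ∈ seen) d →
            ¬ (pvVal g d = 0 ∧ pvScanLt d (x0, y0))))) := by
  intro seen F enc fst
  induction seen, F, enc, fst using probeLoop.induct g w h x0 y0 with
  | case1 seen enc fst =>
    intro _
    rw [probeLoop, if_pos rfl]
    have hempty : ∀ d, ¬ pvTSet g w h [] (fun x => x ∈ seen) d := by
      rintro d ⟨s, hs, -⟩; simp at hs
    constructor
    · intro hb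
      exact ⟨⟨(Bool.and_eq_true _ _).mp hb |>.1, fun d hd => absurd hd (hempty d)⟩,
        ⟨(Bool.and_eq_true _ _).mp hb |>.2, fun d hd => absurd hd (hempty d)⟩⟩
    · rintro ⟨⟨h1, -⟩, ⟨h2, -⟩⟩
      rw [h1, h2]; rfl
  | case2 seen F enc fst hne r ih =>
    intro hF
    obtain ⟨L1, L2, L3, L4⟩ := probeLevel_spec g w h x0 y0 F (enc, fst, seen, [])
    have hnbradj : ∀ d, pvTrav g w h d →
        ((∃ f ∈ F, d ∈ pvNbrs f) ↔ (∃ f ∈ F, pvAdj g w h f d)) := by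
      intro d htd
      constructor <;> rintro ⟨f, hf, hfd⟩
      · exact ⟨f, hf, pvNbrs_adj hfd (hF f hf) htd⟩
      · exact ⟨f, hf, pvAdj_mem_nbrs hfd⟩
    have hnxt : ∀ d, d ∈ r.2.2.2 ↔
        (¬ d ∈ seen ∧ pvTrav g w h d ∧ ∃ f ∈ F, pvAdj g w h f d) := by
      intro d
      rw [L4 d]
      simp only [List.not_mem_nil, false_and, false_or]
      constructor
      · rintro ⟨h1, h2, h3⟩; exact ⟨h1, h2, (hnbradj d h2).mp h3⟩
      · rintro ⟨h1, h2, h3⟩; exact ⟨h1, h2, (hnbradj d h2).mpr h3⟩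
    have hF2 : ∀ s ∈ r.2.2.2, pvTrav g w h s := fun s hs => ((hnxt s).mp hs).2.1
    have hcongr : ∀ x, pvTrav g w h x →
        ((x ∈ r.2.2.1) ↔ ((x ∈ seen) ∨ x ∈ r.2.2.2)) := by
      intro x htx
      rw [L3 x, hnxt x]
      by_cases hs : x ∈ seen
      · simp [hs]
      · simp only [hs, false_or, not_false_iff, true_and]
        constructor
        · rintro ⟨h1, h2⟩; exact ⟨h1, (hnbradj x h1).mp h2⟩
        · rintro ⟨h1, h2⟩; exact ⟨h1, (hnbradj x h1).mpr h2⟩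
    have htransfer := pvTSet_level (Q := fun x => x ∈ seen) hF hnxt
    rw [probeLoop, if_neg hne]
    rw [ih hF2]
    have hTcongr : ∀ d, pvTSet g w h r.2.2.2 (fun x => x ∈ r.2.2.1) d ↔
        pvTSet g w h r.2.2.2 (fun x => x ∈ seen ∨ x ∈ r.2.2.2) d :=
      fun d => pvTSet_congr hcongr
    rw [L1, L2]
    constructor
    · rintro ⟨⟨⟨h1, h2⟩, h3⟩, ⟨⟨h4, h5⟩, h6⟩⟩
      refine ⟨⟨h1, fun d hd => ?_⟩, ⟨h4, fun d hd => ?_⟩⟩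
      · rcases (htransfer d).mp hd with hdF | hd'
        · exact h2 d hdF
        · exact h3 d ((hTcongr d).mpr hd')
      · rcases (htransfer d).mp hd with hdF | hd'
        · exact h5 d hdF
        · exact h6 d ((hTcongr d).mpr hd')
    · rintro ⟨⟨h1, h2⟩, ⟨h4, h5⟩⟩
      refine ⟨⟨⟨h1, fun f hf => h2 f ⟨f, hf, hF f hf, .refl⟩⟩, fun d hd => ?_⟩,
        ⟨⟨h4, fun f hf => h5 f ⟨f, hf, hF f hf, .refl⟩⟩, fun d hd => ?_⟩⟩
      · exact h2 d ((htransfer d).mpr (.inr ((hTcongr d).mp hd)))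
      · exact h5 d ((htransfer d).mpr (.inr ((hTcongr d).mp hd)))

theorem probe_spec {g : List (List Int)} {w h : Int} {c : Int × Int}
    (htrav : pvTrav g w h c) :
    (probe g w h c.1 c.2 = true ↔
      ((∀ d, pvReach g w h c d → ¬ pvBorder w h d) ∧
       (∀ d, pvReach g w h c d → ¬ (pvVal g d = 0 ∧ pvScanLt d c)))) := by
  have hofl : PySem.Set.ofList [((c.1 : Int), (c.2 : Int))] = [(c.1, c.2)] := rfl
  have hF : ∀ s ∈ [((c.1 : Int), (c.2 : Int))], pvTrav g w h s := by
    intro s hs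
    rcases List.mem_singleton.mp hs with rfl
    exact htrav
  have hTiff : ∀ d, pvTSet g w h [((c.1 : Int), (c.2 : Int))]
      (fun x => x ∈ [((c.1 : Int), (c.2 : Int))]) d ↔ pvReach g w h c d := by
    intro d
    constructor
    · rintro ⟨s, hs, -, hra⟩
      rcases List.mem_singleton.mp hs with rfl
      exact pvRA_toReach hra
    · intro hr
      have hc : ((c.1, c.2) : Int × Int) = c := rfl
      refine ⟨(c.1, c.2), List.mem_singleton.mpr rfl, hc ▸ htrav, ?_⟩
      rcases pvRA_extract (C := fun x => x ∈ [((c.1 : Int), (c.2 : Int))]) (hc ▸ hr)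
        with h1 | ⟨n, hn, h2⟩
      · exact pvRA_mono (fun x hx => .inr hx) h1
      · rcases List.mem_singleton.mp hn with rfl
        exact pvRA_mono (fun x hx => .inr hx) h2
  rw [probe, hofl, probeLoop_spec g w h c.1 c.2 _ _ _ _ hF]
  have hc : ((c.1, c.2) : Int × Int) = c := rfl
  rw [hc]
  simp only [hTiff, true_and]
-- ===== scan order =====

theorem pvScanL_mem (w h : Int) (c : Int × Int) :
    c ∈ pvScanL w h ↔ pvInb w h c := by
  unfold pvScanL pvInb
  simp only [List.mem_flatMap, List.mem_map, PySem.List.mem_pyRange_one]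
  constructor
  · rintro ⟨y, hy, x, hx, rfl⟩
    exact ⟨hx.1, hx.2, hy.1, hy.2⟩
  · rintro ⟨h1, h2, h3, h4⟩
    exact ⟨c.2, ⟨h3, h4⟩, c.1, ⟨h1, h2⟩, rfl⟩

theorem pvScanL_pairwise (w h : Int) : (pvScanL w h).Pairwise pvScanLt := by
  unfold pvScanL
  rw [List.pairwise_flatMap]
  constructor
  · intro y _
    rw [List.pairwise_map]
    exact (PySem.List.pairwise_lt_pyRange_one 0 w).imp (fun hab => Or.inr ⟨rfl, hab⟩)
  · exact (PySem.List.pairwise_lt_pyRange_one 0 h).imp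
      (fun hab => by
        rintro p hp q hq
        simp only [List.mem_map] at hp hq
        obtain ⟨x1, -, rfl⟩ := hp
        obtain ⟨x2, -, rfl⟩ := hq
        exact Or.inl hab)

theorem pvScanLt_trans {a b c : Int × Int} (h1 : pvScanLt a b) (h2 : pvScanLt b c) :
    pvScanLt a c := by
  unfold pvScanLt at *; omega

theorem pvScanLt_irrefl (a : Int × Int) : ¬ pvScanLt a a := by
  unfold pvScanLt; omega

-- ===== the two per-cell steps, and the ports as folds over the scan order =====

def pvStepA (g : List (List Int)) (w h : Int)
    (st : List (List Bool) × Int) (c : Int × Int) : List (List Bool) × Int :=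
  if (g.getD c.2.toNat []).getD c.1.toNat 0 = 0 ∧
      (st.1.getD c.2.toNat []).getD c.1.toNat true = false then
    ((flood g w h st.1 c.1 c.2).2,
      if (flood g w h st.1 c.1 c.2).1 then st.2 + 1 else st.2)
  else st

def pvStepB (g : List (List Int)) (w h : Int) (acc : Int) (c : Int × Int) : Int :=
  if (g.getD c.2.toNat []).getD c.1.toNat 0 = 0 ∧ probe g w h c.1 c.2 = true then
    acc + 1
  else acc

theorem count_holes_eq_fold (g : List (List Int)) :
    count_holes g =
      ((pvScanL ((g.headD []).length : Int) (g.length : Int)).foldl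
        (pvStepA g ((g.headD []).length : Int) (g.length : Int))
        (List.replicate g.length (List.replicate (g.headD []).length false),
          (0 : Int))).2 := by
  unfold count_holes pvScanL
  rw [List.foldl_flatMap]
  simp only [List.foldl_map, PySem.List.len]
  rfl

-- ===== the main simultaneous induction over the scan order (A = probe count) =====

theorem pvMain (g : List (List Int)) (w h : Int) :
    ∀ (R D : List (Int × Int)) (v : List (List Bool)) (holes : Int),
      pvScanL w h = D ++ R →
      pvShape w h v →
      (∀ x, pvInb w h x → (pvReadV v x = true ↔
        ∃ z ∈ D, pvVal g z = 0 ∧ pvReach g w h z x)) →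
      (R.foldl (pvStepA g w h) (v, holes)).2 = R.foldl (pvStepB g w h) holes := by
  intro R
  induction R with
  | nil => intro D v holes _ _ _; rfl
  | cons c R' ih =>
    intro D v holes hsplit hsh hinv
    have hpw : (D ++ c :: R').Pairwise pvScanLt := hsplit ▸ pvScanL_pairwise w h
    have hcinb : pvInb w h c := by
      refine (pvScanL_mem w h c).mp ?_
      rw [hsplit]; simp
    have hsplit' : pvScanL w h = (D ++ [c]) ++ R' := by
      rw [hsplit, List.append_assoc]; rfl
    have hprefix : ∀ z, (pvInb w h z ∧ pvScanLt z c) ↔ z ∈ D := by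
      intro z
      constructor
      · rintro ⟨hzi, hzlt⟩
        have hzscan : z ∈ D ++ c :: R' := by
          rw [← hsplit]; exact (pvScanL_mem w h z).mpr hzi
        rcases List.mem_append.mp hzscan with hz | hz
        · exact hz
        · rcases List.mem_cons.mp hz with rfl | hz
          · exact absurd hzlt (by unfold pvScanLt; omega)
          · have := (List.pairwise_cons.mp (List.pairwise_append.mp hpw).2.1).1 z hz
            unfold pvScanLt at hzlt this; omega
      · intro hzD
        refine ⟨(pvScanL_mem w h z).mp (by rw [hsplit]; simp [hzD]), ?_⟩
        exact hpw.rel_of_mem_append hzD (List.mem_cons_self)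
    rw [List.foldl_cons, List.foldl_cons]
    have hval : pvVal g c = (g.getD c.2.toNat []).getD c.1.toNat 0 := rfl
    by_cases hc0 : pvVal g c = 0
    · have htravc : pvTrav g w h c := ⟨hcinb, by rw [hc0]; omega⟩
      rcases Bool.eq_false_or_eq_true (pvReadV v c) with hcread | hcread
      · -- already-visited white cell: A skips, the probe sees an earlier zero
        obtain ⟨z, hzD, hz0, hzr⟩ := (hinv c hcinb).mp hcread
        have hstepA : pvStepA g w h (v, holes) c = (v, holes) := by
          unfold pvStepA
          rw [if_neg (fun hcond =>
            absurd (show pvReadV v c = false from hcond.2) (by simp [hcread]))]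
        have hprobe : probe g w h c.1 c.2 = false := by
          rcases Bool.eq_false_or_eq_true (probe g w h c.1 c.2) with hpb | hpb
          · exfalso
            obtain ⟨-, hsecond⟩ := (probe_spec htravc).mp hpb
            refine hsecond z (pvReach_symm hzr) ⟨hz0, ?_⟩
            exact ((hprefix z).symm.mp hzD).2
          · exact hpb
        have hstepB : pvStepB g w h holes c = holes := by
          unfold pvStepB
          rw [if_neg (by rintro ⟨-, hp⟩; rw [hprobe] at hp; exact absurd hp (by simp))]
        rw [hstepA, hstepB]
        refine ih (D ++ [c]) _ _ hsplit' hsh ?_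
        intro x hx
        rw [hinv x hx]
        constructor
        · rintro ⟨z', hz', h0, hr⟩
          exact ⟨z', by simp [hz'], h0, hr⟩
        · rintro ⟨z', hz', h0, hr⟩
          rcases List.mem_append.mp hz' with hm | hm
          · exact ⟨z', hm, h0, hr⟩
          · rcases List.mem_singleton.mp hm with rfl
            exact ⟨z, hzD, hz0, pvReach_trans hzr hr⟩
      · -- unvisited white cell: A floods it, the probe succeeds or fails with it
        have hcl : ∀ a b, pvAdj g w h a b →
            (pvReadV v a = true ↔ pvReadV v b = true) := by
          intro a b hadj
          rw [hinv a hadj.1.1, hinv b hadj.2.1.1]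
          constructor <;> rintro ⟨z, hz, h0, hr⟩
          · exact ⟨z, hz, h0, hr.tail ⟨hadj, not_false⟩⟩
          · exact ⟨z, hz, h0, hr.tail ⟨pvAdj_symm hadj, not_false⟩⟩
        obtain ⟨f1, f2, f3⟩ := flood_spec hsh hcl htravc hcread
        have h2nd : ∀ d, pvReach g w h c d →
            ¬ (pvVal g d = 0 ∧ pvScanLt d c) := by
          rintro d hr ⟨hd0, hdlt⟩
          rcases pvRA_trav_right hr with rfl | htd
          · unfold pvScanLt at hdlt; omega
          · have hdD : d ∈ D := (hprefix d).mp ⟨htd.1, hdlt⟩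
            have : pvReadV v c = true :=
              (hinv c hcinb).mpr ⟨d, hdD, hd0, pvReach_symm hr⟩
            rw [hcread] at this; exact absurd this (by simp)
        have hfp : (flood g w h v c.1 c.2).1 = probe g w h c.1 c.2 := by
          refine Bool.coe_iff_coe.mp ?_
          rw [f1, probe_spec htravc]
          exact ⟨fun hnb => ⟨hnb, h2nd⟩, fun hp => hp.1⟩
        have hstepA : pvStepA g w h (v, holes) c =
            ((flood g w h v c.1 c.2).2,
              if (flood g w h v c.1 c.2).1 then holes + 1 else holes) := by
          unfold pvStepA
          rw [if_pos ⟨hval ▸ hc0, show ((v, holes).1.getD c.2.toNat []).getD c.1.toNat true = false from hcread⟩]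
        have hstepB : pvStepB g w h holes c =
            (if (flood g w h v c.1 c.2).1 then holes + 1 else holes) := by
          unfold pvStepB
          rw [hfp]
          by_cases hp : probe g w h c.1 c.2 = true
          · rw [if_pos ⟨hval ▸ hc0, hp⟩, if_pos hp]
          · rw [if_neg (fun hcond => hp hcond.2),
              if_neg (by simpa using hp)]
        rw [hstepA, hstepB]
        refine ih (D ++ [c]) _ _ hsplit' f2 ?_
        intro x hx
        rw [f3 x hx, hinv x hx]
        constructor
        · rintro (⟨z, hz, h0, hr⟩ | hr)
          · exact ⟨z, by simp [hz], h0, hr⟩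
          · exact ⟨c, by simp, hc0, hr⟩
        · rintro ⟨z, hz, h0, hr⟩
          rcases List.mem_append.mp hz with hz' | hz'
          · exact .inl ⟨z, hz', h0, hr⟩
          · rcases List.mem_singleton.mp hz' with rfl
            exact .inr hr
    · -- black (or non-white) cell: both sides skip it
      have hstepA : pvStepA g w h (v, holes) c = (v, holes) := by
        unfold pvStepA
        rw [if_neg (by rintro ⟨h0, -⟩; exact hc0 (hval ▸ h0))]
      have hstepB : pvStepB g w h holes c = holes := by
        unfold pvStepB
        rw [if_neg (by rintro ⟨h0, -⟩; exact hc0 (hval ▸ h0))]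
      rw [hstepA, hstepB]
      refine ih (D ++ [c]) _ _ hsplit' hsh ?_
      intro x hx
      rw [hinv x hx]
      constructor
      · rintro ⟨z', hz', h0, hr⟩
        exact ⟨z', by simp [hz'], h0, hr⟩
      · rintro ⟨z', hz', h0, hr⟩
        rcases List.mem_append.mp hz' with hm | hm
        · exact ⟨z', hm, h0, hr⟩
        · rcases List.mem_singleton.mp hm with rfl
          exact absurd h0 hc0

theorem pvA_eq_probeCount (g : List (List Int)) :
    count_holes g = (pvScanL ((g.headD []).length : Int) (g.length : Int)).foldl
      (pvStepB g ((g.headD []).length : Int) (g.length : Int)) 0 := by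
  rw [count_holes_eq_fold]
  refine pvMain g ((g.headD []).length : Int) ((g.length : Int))
    (pvScanL ((g.headD []).length : Int) (g.length : Int)) [] _ 0
    (List.nil_append _).symm ⟨by simp, ?_⟩ ?_
  · intro r hr
    rw [List.eq_of_mem_replicate hr]
    simp
  · intro x hx
    obtain ⟨h1, h2, h3, h4⟩ := hx
    have hy : x.2.toNat < g.length := by omega
    have hx1 : x.1.toNat < (g.headD []).length := by omega
    have hread : pvReadV (List.replicate g.length
        (List.replicate (g.headD []).length false)) x = false := by
      unfold pvReadV
      rw [List.getD_eq_getElem _ [] (by simpa using hy), List.getElem_replicate,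
        List.getD_eq_getElem _ true (by simpa using hx1), List.getElem_replicate]
    rw [hread]
    simp
-- ===== union-find (port B) correctness =====

def pvEnc (w : Int) (c : Int × Int) : Int := c.2 * w + c.1

def pvTravB (g : List (List Int)) (w h : Int) (c : Int × Int) : Bool :=
  decide (0 ≤ c.1) && decide (c.1 < w) && decide (0 ≤ c.2) && decide (c.2 < h) &&
    !(decide (pvVal g c = 1))

theorem pvTravB_iff {g : List (List Int)} {w h : Int} {c : Int × Int} :
    pvTravB g w h c = true ↔ pvTrav g w h c := by
  unfold pvTravB pvTrav pvInb
  simp [and_assoc]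

theorem pvEnc_inj {w h : Int} {c d : Int × Int} (hc : pvInb w h c) (hd : pvInb w h d)
    (he : pvEnc w c = pvEnc w d) : c = d := by
  obtain ⟨hc1, hc2, hc3, hc4⟩ := hc
  obtain ⟨hd1, hd2, hd3, hd4⟩ := hd
  unfold pvEnc at he
  have h2 : c.2 = d.2 := by
    rcases lt_trichotomy c.2 d.2 with hlt | heq | hgt
    · have : (c.2 + 1) * w ≤ d.2 * w := by
        have := mul_le_mul_of_nonneg_right (by omega : c.2 + 1 ≤ d.2) (by omega : (0:Int) ≤ w)
        linarith
      nlinarith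
    · exact heq
    · have : (d.2 + 1) * w ≤ c.2 * w := by
        have := mul_le_mul_of_nonneg_right (by omega : d.2 + 1 ≤ c.2) (by omega : (0:Int) ≤ w)
        linarith
      nlinarith
  have h1 : c.1 = d.1 := by rw [h2] at he; omega
  exact Prod.ext h1 h2

-- the canonical root the ports compute: find with fuel = dict size + 1
def pvRoot (p : PySem.Dict Int Int) (i : Int) : Int := ufFind p (p.size + 1) i

-- measure: number of keys strictly below i
def pvM (p : PySem.Dict Int Int) (i : Int) : Nat :=
  (p.keys.filter (fun j => decide (j < i))).length

theorem pvSizeKeys (p : PySem.Dict Int Int) : p.size = p.keys.length := by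
  simp [PySem.Dict.size, PySem.Dict.keys]

structure UFCore (g : List (List Int)) (w h : Int) (K : List (Int × Int))
    (p : PySem.Dict Int Int) : Prop where
  keysEq : p.keys = (K.filter (pvTravB g w h)).map (pvEnc w)
  nodup : p.keys.Nodup
  par_mem : ∀ i ∈ p.keys, p.getD i i ∈ p.keys
  par_le : ∀ i ∈ p.keys, p.getD i i ≤ i
  par_reach : ∀ c d : Int × Int, pvTrav g w h c → pvTrav g w h d → pvEnc w c ∈ p.keys →
      p.getD (pvEnc w c) (pvEnc w c) = pvEnc w d → pvReach g w h c d

def UFConn (g : List (List Int)) (w h : Int) (D : List (Int × Int))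
    (p : PySem.Dict Int Int) : Prop :=
  ∀ c d, c ∈ D → d ∈ D → pvAdj g w h c d →
    pvRoot p (pvEnc w c) = pvRoot p (pvEnc w d)

theorem UFCore.key_cell {g : List (List Int)} {w h : Int} {K : List (Int × Int)}
    {p : PySem.Dict Int Int} (hc : UFCore g w h K p) {j : Int} (hj : j ∈ p.keys) :
    ∃ c, c ∈ K ∧ pvTrav g w h c ∧ pvEnc w c = j := by
  rw [hc.keysEq] at hj
  obtain ⟨c, hcf, hce⟩ := List.mem_map.mp hj
  obtain ⟨hcK, hct⟩ := List.mem_filter.mp hcf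
  exact ⟨c, hcK, pvTravB_iff.mp hct, hce⟩

theorem ufFind_of_root (p : PySem.Dict Int Int) (f : Nat) (i : Int)
    (h : p.getD i i = i) : ufFind p f i = i := by
  cases f <;> simp [ufFind, h]

theorem pvM_lt_of_par {p : PySem.Dict Int Int} (hnd : p.keys.Nodup) {i : Int}
    (hi : i ∈ p.keys) (hmem : p.getD i i ∈ p.keys) (hlt : p.getD i i < i) :
    pvM p (p.getD i i) < pvM p i := by
  set j := p.getD i i with hj
  have h1 : (p.keys.filter (fun k => decide (k < i))).filter (fun k => decide (k < j))
      = p.keys.filter (fun k => decide (k < j)) := by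
    rw [List.filter_filter]
    apply List.filter_congr
    intro k _
    by_cases hk : k < j
    · simp [hk, show k < i by omega]
    · simp [hk]
  unfold pvM
  rw [← h1, List.length_filter_lt_length_iff_exists]
  exact ⟨j, List.mem_filter.mpr ⟨hmem, by simpa using hlt⟩, by simp⟩

theorem pvM_lt_keys {p : PySem.Dict Int Int} {i : Int} (hi : i ∈ p.keys) :
    pvM p i < p.keys.length := by
  unfold pvM
  rw [List.length_filter_lt_length_iff_exists]
  exact ⟨i, hi, by simp⟩

theorem ufFind_fuel' {p : PySem.Dict Int Int} (hnd : p.keys.Nodup)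
    (hmem : ∀ i ∈ p.keys, p.getD i i ∈ p.keys) (hle : ∀ i ∈ p.keys, p.getD i i ≤ i) :
    ∀ k i, i ∈ p.keys → pvM p i < k → ∀ f1 f2, pvM p i < f1 → pvM p i < f2 →
      ufFind p f1 i = ufFind p f2 i := by
  intro k
  induction k with
  | zero => intro i hi hk; omega
  | succ k ih =>
    intro i hi hk f1 f2 h1 h2
    cases f1 with
    | zero => omega
    | succ f1 =>
      cases f2 with
      | zero => omega
      | succ f2 =>
        by_cases hroot : p.getD i i = i
        · simp [ufFind, hroot]
        · have hj := hmem i hi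
          have hlt : p.getD i i < i := lt_of_le_of_ne (hle i hi) hroot
          have hm := pvM_lt_of_par hnd hi hj hlt
          simp only [ufFind, if_neg hroot]
          exact ih (p.getD i i) hj (by omega) f1 f2 (by omega) (by omega)

theorem ufFind_fuel {g : List (List Int)} {w h : Int} {K : List (Int × Int)}
    {p : PySem.Dict Int Int} (hc : UFCore g w h K p) :
    ∀ k i, i ∈ p.keys → pvM p i < k → ∀ f1 f2, pvM p i < f1 → pvM p i < f2 →
      ufFind p f1 i = ufFind p f2 i :=
  ufFind_fuel' hc.nodup hc.par_mem hc.par_le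

theorem ufFind_spec' {p : PySem.Dict Int Int} (hnd : p.keys.Nodup)
    (hmem : ∀ i ∈ p.keys, p.getD i i ∈ p.keys) (hle : ∀ i ∈ p.keys, p.getD i i ≤ i) :
    ∀ k i, i ∈ p.keys → pvM p i < k → ∀ f, pvM p i < f →
      (ufFind p f i ∈ p.keys ∧ p.getD (ufFind p f i) (ufFind p f i) = ufFind p f i ∧
        ufFind p f i ≤ i) := by
  intro k
  induction k with
  | zero => intro i hi hk; omega
  | succ k ih =>
    intro i hi hk f hf
    cases f with
    | zero => omega
    | succ f =>
      by_cases hroot : p.getD i i = i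
      · simp only [ufFind, if_pos hroot]
        exact ⟨hi, hroot, le_refl i⟩
      · have hj := hmem i hi
        have hlt : p.getD i i < i := lt_of_le_of_ne (hle i hi) hroot
        have hm := pvM_lt_of_par hnd hi hj hlt
        simp only [ufFind, if_neg hroot]
        obtain ⟨a1, a2, a3⟩ := ih (p.getD i i) hj (by omega) f (by omega)
        exact ⟨a1, a2, by omega⟩

theorem ufFind_spec {g : List (List Int)} {w h : Int} {K : List (Int × Int)}
    {p : PySem.Dict Int Int} (hc : UFCore g w h K p) :
    ∀ k i, i ∈ p.keys → pvM p i < k → ∀ f, pvM p i < f →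
      (ufFind p f i ∈ p.keys ∧ p.getD (ufFind p f i) (ufFind p f i) = ufFind p f i ∧
        ufFind p f i ≤ i) :=
  ufFind_spec' hc.nodup hc.par_mem hc.par_le

theorem ufFind_reach {g : List (List Int)} {w h : Int} {K : List (Int × Int)}
    {p : PySem.Dict Int Int} (hc : UFCore g w h K p) :
    ∀ k c, pvTrav g w h c → pvEnc w c ∈ p.keys → pvM p (pvEnc w c) < k →
      ∀ f, pvM p (pvEnc w c) < f →
      ∃ d, pvTrav g w h d ∧ pvEnc w d = ufFind p f (pvEnc w c) ∧ pvReach g w h c d := by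
  intro k
  induction k with
  | zero => intro c _ _ hk; omega
  | succ k ih =>
    intro c htrav hkey hk f hf
    cases f with
    | zero => omega
    | succ f =>
      by_cases hroot : p.getD (pvEnc w c) (pvEnc w c) = pvEnc w c
      · exact ⟨c, htrav, by simp [ufFind, hroot], .refl⟩
      · have hj := hc.par_mem _ hkey
        have hlt : p.getD (pvEnc w c) (pvEnc w c) < pvEnc w c :=
          lt_of_le_of_ne (hc.par_le _ hkey) hroot
        have hm := pvM_lt_of_par hc.nodup hkey hj hlt
        obtain ⟨c', hc'K, hc't, hc'e⟩ := hc.key_cell hj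
        have hre : pvReach g w h c c' := hc.par_reach c c' htrav hc't hkey hc'e.symm
        have hkey' : pvEnc w c' ∈ p.keys := by rw [hc'e]; exact hj
        obtain ⟨d, hd1, hd2, hd3⟩ := ih c' hc't hkey' (by rw [hc'e]; omega) f
          (by rw [hc'e]; omega)
        refine ⟨d, hd1, ?_, pvReach_trans hre hd3⟩
        rw [hd2]
        simp only [ufFind, if_neg hroot]
        rw [hc'e]

theorem pvRoot_spec {g : List (List Int)} {w h : Int} {K : List (Int × Int)}
    {p : PySem.Dict Int Int} (hc : UFCore g w h K p) {i : Int} (hi : i ∈ p.keys) :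
    pvRoot p i ∈ p.keys ∧ p.getD (pvRoot p i) (pvRoot p i) = pvRoot p i ∧ pvRoot p i ≤ i := by
  unfold pvRoot
  refine ufFind_spec hc (pvM p i + 1) i hi (by omega) _ ?_
  rw [pvSizeKeys]
  have := pvM_lt_keys hi
  omega

theorem pvRoot_reach {g : List (List Int)} {w h : Int} {K : List (Int × Int)}
    {p : PySem.Dict Int Int} (hc : UFCore g w h K p) {c : Int × Int}
    (htrav : pvTrav g w h c) (hi : pvEnc w c ∈ p.keys) :
    ∃ d, pvTrav g w h d ∧ pvEnc w d = pvRoot p (pvEnc w c) ∧ pvReach g w h c d := by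
  unfold pvRoot
  refine ufFind_reach hc (pvM p (pvEnc w c) + 1) c htrav hi (by omega) _ ?_
  rw [pvSizeKeys]
  have := pvM_lt_keys hi
  omega

theorem ufFind_congr {p q : PySem.Dict Int Int}
    (hpq : ∀ j ∈ p.keys, q.getD j j = p.getD j j)
    (hmem : ∀ j ∈ p.keys, p.getD j j ∈ p.keys) :
    ∀ f i, i ∈ p.keys → ufFind q f i = ufFind p f i := by
  intro f
  induction f with
  | zero => intro i _; rfl
  | succ f ih =>
    intro i hi
    simp only [ufFind, hpq i hi]
    by_cases hroot : p.getD i i = i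
    · simp [hroot]
    · rw [if_neg hroot, if_neg hroot]
      exact ih _ (hmem i hi)

theorem pvRoot_fresh {g : List (List Int)} {w h : Int} {K : List (Int × Int)}
    {p : PySem.Dict Int Int} (hc : UFCore g w h K p) {i : Int} (hi : i ∉ p.keys) :
    ∀ j ∈ p.keys, pvRoot (p.insert i i) j = pvRoot p j := by
  intro j hj
  have hcont : p.contains i = false := by
    rcases Bool.eq_false_or_eq_true (p.contains i) with hb | hb
    · exact absurd ((PySem.Dict.contains_iff_mem_keys p i).mp hb) hi
    · exact hb
  have hsz : (p.insert i i).size = p.size + 1 := by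
    rw [PySem.Dict.size_insert, if_neg (by simp [hcont])]
  have hgd : ∀ k ∈ p.keys, (p.insert i i).getD k k = p.getD k k := by
    intro k hk
    rw [PySem.Dict.getD_insert, if_neg (fun he => hi (by rw [← he]; exact hk))]
  unfold pvRoot
  rw [hsz, ufFind_congr hgd hc.par_mem _ j hj]
  have hb1 := pvM_lt_keys hj
  have hb2 := pvSizeKeys p
  exact ufFind_fuel hc (pvM p j + 1) j hj (by omega) _ _ (by omega) (by omega)

theorem UFCore_fresh {g : List (List Int)} {w h : Int} {K : List (Int × Int)}
    {p : PySem.Dict Int Int} (hc : UFCore g w h K p) {c : Int × Int}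
    (htrav : pvTrav g w h c) (hfresh : pvEnc w c ∉ p.keys) :
    UFCore g w h (K ++ [c]) (p.insert (pvEnc w c) (pvEnc w c)) := by
  have hcont : p.contains (pvEnc w c) = false := by
    rcases Bool.eq_false_or_eq_true (p.contains (pvEnc w c)) with hb | hb
    · exact absurd ((PySem.Dict.contains_iff_mem_keys p _).mp hb) hfresh
    · exact hb
  have hkeys : (p.insert (pvEnc w c) (pvEnc w c)).keys = p.keys ++ [pvEnc w c] :=
    PySem.Dict.keys_insert_of_not_contains p _ hcont
  have hgd : ∀ k, (p.insert (pvEnc w c) (pvEnc w c)).getD k k =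
      if k = pvEnc w c then pvEnc w c else p.getD k k := by
    intro k; rw [PySem.Dict.getD_insert]
  refine ⟨?_, ?_, ?_, ?_, ?_⟩
  · rw [hkeys, List.filter_append, List.map_append, hc.keysEq]
    have : List.filter (pvTravB g w h) [c] = [c] := by
      simp [pvTravB_iff.mpr htrav]
    rw [this]
    rfl
  · rw [hkeys]
    simp only [List.nodup_append, List.nodup_singleton, true_and]
    refine ⟨hc.nodup, ?_⟩
    intro a ha b hb
    rw [List.mem_singleton.mp hb]
    exact fun he => hfresh (by rw [← he]; exact ha)
  · intro j hj
    rw [hkeys] at hj ⊢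
    rw [hgd]
    by_cases hji : j = pvEnc w c
    · simp [hji]
    · rw [if_neg hji]
      rcases List.mem_append.mp hj with hj' | hj'
      · exact List.mem_append.mpr (.inl (hc.par_mem j hj'))
      · exact absurd (List.mem_singleton.mp hj') hji
  · intro j hj
    rw [hkeys] at hj
    rw [hgd]
    by_cases hji : j = pvEnc w c
    · simp [hji]
    · rw [if_neg hji]
      rcases List.mem_append.mp hj with hj' | hj'
      · exact hc.par_le j hj'
      · exact absurd (List.mem_singleton.mp hj') hji
  · intro c' d' ht1 ht2 hk he
    rw [hgd] at he
    by_cases hji : pvEnc w c' = pvEnc w c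
    · rw [if_pos hji] at he
      have hcc : c' = c := pvEnc_inj ht1.1 htrav.1 hji
      have hdc : d' = c := pvEnc_inj ht2.1 htrav.1 (by rw [← he])
      rw [hcc, hdc]
      exact .refl
    · rw [if_neg hji] at he
      rw [hkeys] at hk
      rcases List.mem_append.mp hk with hk' | hk'
      · exact hc.par_reach c' d' ht1 ht2 hk' he
      · exact absurd (List.mem_singleton.mp hk') hji

theorem pvRoot_union_root {g : List (List Int)} {w h : Int} {K : List (Int × Int)}
    {p : PySem.Dict Int Int} (hc : UFCore g w h K p) {r1 r2 : Int}
    (h1 : r1 ∈ p.keys) (hr1 : p.getD r1 r1 = r1)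
    (h2 : r2 ∈ p.keys) (hr2 : p.getD r2 r2 = r2) (hlt : r1 < r2) :
    ∀ j ∈ p.keys, pvRoot (p.insert r2 r1) j =
      if pvRoot p j = r2 then r1 else pvRoot p j := by
  have hne12 : r1 ≠ r2 := ne_of_lt hlt
  have hcont : p.contains r2 = true := (PySem.Dict.contains_iff_mem_keys p r2).mpr h2
  have hsz : (p.insert r2 r1).size = p.size := by
    rw [PySem.Dict.size_insert, if_pos hcont]
  have hkeys : (p.insert r2 r1).keys = p.keys := PySem.Dict.keys_insert_of_contains p _ hcont
  have hgd : ∀ k, (p.insert r2 r1).getD k k = if k = r2 then r1 else p.getD k k := by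
    intro k; rw [PySem.Dict.getD_insert]
  have hM : ∀ x, pvM (p.insert r2 r1) x = pvM p x := by
    intro x; unfold pvM; rw [hkeys]
  have hmem' : ∀ j ∈ (p.insert r2 r1).keys,
      (p.insert r2 r1).getD j j ∈ (p.insert r2 r1).keys := by
    intro j hj
    rw [hkeys] at hj ⊢
    rw [hgd]
    by_cases hj2 : j = r2
    · rw [if_pos hj2]; exact h1
    · rw [if_neg hj2]; exact hc.par_mem j hj
  have hle' : ∀ j ∈ (p.insert r2 r1).keys, (p.insert r2 r1).getD j j ≤ j := by
    intro j hj
    rw [hkeys] at hj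
    rw [hgd]
    by_cases hj2 : j = r2
    · rw [if_pos hj2, hj2]; omega
    · rw [if_neg hj2]; exact hc.par_le j hj
  have hnd' : (p.insert r2 r1).keys.Nodup := by rw [hkeys]; exact hc.nodup
  have hkl := pvSizeKeys p
  have hszk : (p.insert r2 r1).size = p.keys.length := by rw [hsz, hkl]
  have hsucc : ∀ (q : PySem.Dict Int Int) (f : Nat) (i : Int),
      ufFind q (f+1) i = if q.getD i i = i then i else ufFind q f (q.getD i i) :=
    fun q f i => rfl
  -- step lemmas: pvRoot follows one parent link
  have hstep : ∀ j ∈ p.keys, p.getD j j ≠ j → pvRoot p j = pvRoot p (p.getD j j) := by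
    intro j hj hroot
    have hjm := hc.par_mem j hj
    have hjl : p.getD j j < j := lt_of_le_of_ne (hc.par_le j hj) hroot
    have hm := pvM_lt_of_par hc.nodup hj hjm hjl
    have hb := pvM_lt_keys hj
    unfold pvRoot
    rw [hkl]
    have h0 : p.keys.length = p.keys.length - 1 + 1 := by
      have : 0 < p.keys.length := List.length_pos_of_mem hj
      omega
    rw [h0, hsucc, if_neg hroot]
    exact ufFind_fuel hc (pvM p (p.getD j j) + 1) _ hjm (by omega) _ _ (by omega) (by omega)
  have hstep' : ∀ j ∈ p.keys, j ≠ r2 → p.getD j j ≠ j →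
      pvRoot (p.insert r2 r1) j = pvRoot (p.insert r2 r1) (p.getD j j) := by
    intro j hj hj2 hroot
    have hjm := hc.par_mem j hj
    have hjl : p.getD j j < j := lt_of_le_of_ne (hc.par_le j hj) hroot
    have hm := pvM_lt_of_par hc.nodup hj hjm hjl
    have hb := pvM_lt_keys hj
    unfold pvRoot
    rw [hszk]
    have h0 : p.keys.length = p.keys.length - 1 + 1 := by
      have : 0 < p.keys.length := List.length_pos_of_mem hj
      omega
    rw [h0]
    have hgdj : (p.insert r2 r1).getD j j = p.getD j j := by rw [hgd, if_neg hj2]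
    rw [h0, hsucc, hgdj, if_neg hroot]
    exact ufFind_fuel' hnd' hmem' hle' (pvM (p.insert r2 r1) (p.getD j j) + 1)
      (p.getD j j) (by rw [hkeys]; exact hjm) (by omega) _ _
      (by rw [hM]; omega) (by rw [hM]; omega)
  -- main induction
  suffices hmain : ∀ k j, j ∈ p.keys → pvM p j < k →
      pvRoot (p.insert r2 r1) j = if pvRoot p j = r2 then r1 else pvRoot p j by
    intro j hj
    exact hmain (pvM p j + 1) j hj (by omega)
  intro k
  induction k with
  | zero => intro j hj hk; omega
  | succ k ih =>
    intro j hj hk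
    by_cases hroot : p.getD j j = j
    · have hrp : pvRoot p j = j := ufFind_of_root _ _ _ hroot
      by_cases hj2 : j = r2
      · subst hj2
        rw [hrp, if_pos rfl]
        unfold pvRoot
        rw [hszk]
        have h0 : p.keys.length = p.keys.length - 1 + 1 := by
          have : 0 < p.keys.length := List.length_pos_of_mem hj
          omega
        have hgdr2 : (p.insert j r1).getD j j = r1 := by rw [hgd, if_pos rfl]
        rw [h0, hsucc, hgdr2, if_neg (by exact hne12)]
        exact ufFind_of_root _ _ _ (by rw [hgd, if_neg hne12]; exact hr1)
      · have : pvRoot (p.insert r2 r1) j = j :=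
          ufFind_of_root _ _ _ (by rw [hgd, if_neg hj2]; exact hroot)
        rw [this, hrp, if_neg hj2]
    · have hj2 : j ≠ r2 := by
        intro he; rw [he] at hroot; exact hroot hr2
      have hjm := hc.par_mem j hj
      have hjl : p.getD j j < j := lt_of_le_of_ne (hc.par_le j hj) hroot
      have hm := pvM_lt_of_par hc.nodup hj hjm hjl
      rw [hstep' j hj hj2 hroot, hstep j hj hroot]
      exact ih (p.getD j j) hjm (by omega)

theorem UFCore_union {g : List (List Int)} {w h : Int} {K : List (Int × Int)}
    {p : PySem.Dict Int Int} (hc : UFCore g w h K p) {r1 r2 : Int}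
    (h1 : r1 ∈ p.keys) (hr1 : p.getD r1 r1 = r1)
    (h2 : r2 ∈ p.keys) (hr2 : p.getD r2 r2 = r2) (hlt : r1 < r2)
    (hre : ∀ e1 e2 : Int × Int, pvTrav g w h e1 → pvTrav g w h e2 →
      pvEnc w e1 = r1 → pvEnc w e2 = r2 → pvReach g w h e2 e1) :
    UFCore g w h K (p.insert r2 r1) := by
  have hne12 : r1 ≠ r2 := ne_of_lt hlt
  have hcont : p.contains r2 = true := (PySem.Dict.contains_iff_mem_keys p r2).mpr h2
  have hkeys : (p.insert r2 r1).keys = p.keys := PySem.Dict.keys_insert_of_contains p _ hcont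
  have hgd : ∀ k, (p.insert r2 r1).getD k k = if k = r2 then r1 else p.getD k k := by
    intro k; rw [PySem.Dict.getD_insert]
  refine ⟨by rw [hkeys]; exact hc.keysEq, by rw [hkeys]; exact hc.nodup, ?_, ?_, ?_⟩
  · intro j hj
    rw [hkeys] at hj ⊢
    rw [hgd]
    by_cases hj2 : j = r2
    · rw [if_pos hj2]; exact h1
    · rw [if_neg hj2]; exact hc.par_mem j hj
  · intro j hj
    rw [hkeys] at hj
    rw [hgd]
    by_cases hj2 : j = r2
    · rw [if_pos hj2, hj2]; omega
    · rw [if_neg hj2]; exact hc.par_le j hj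
  · intro c' d' ht1 ht2 hk he
    rw [hkeys] at hk
    rw [hgd] at he
    by_cases hj2 : pvEnc w c' = r2
    · rw [if_pos hj2] at he
      exact hre d' c' ht2 ht1 he.symm hj2
    · rw [if_neg hj2] at he
      exact hc.par_reach c' d' ht1 ht2 hk he

theorem ufUnion_good {g : List (List Int)} {w h : Int} {K : List (Int × Int)}
    {p : PySem.Dict Int Int} (hc : UFCore g w h K p) {c d : Int × Int}
    (hct : pvTrav g w h c) (hdt : pvTrav g w h d)
    (hck : pvEnc w c ∈ p.keys) (hdk : pvEnc w d ∈ p.keys)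
    (hreach : pvReach g w h c d) :
    UFCore g w h K (ufUnion p (pvEnc w c) (pvEnc w d)) ∧
    pvRoot (ufUnion p (pvEnc w c) (pvEnc w d)) (pvEnc w c)
      = pvRoot (ufUnion p (pvEnc w c) (pvEnc w d)) (pvEnc w d) ∧
    (∀ j k, j ∈ p.keys → k ∈ p.keys → pvRoot p j = pvRoot p k →
      pvRoot (ufUnion p (pvEnc w c) (pvEnc w d)) j
        = pvRoot (ufUnion p (pvEnc w c) (pvEnc w d)) k) := by
  have hu : ufUnion p (pvEnc w c) (pvEnc w d) =
      if pvRoot p (pvEnc w c) < pvRoot p (pvEnc w d) then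
        p.insert (pvRoot p (pvEnc w d)) (pvRoot p (pvEnc w c))
      else if pvRoot p (pvEnc w d) < pvRoot p (pvEnc w c) then
        p.insert (pvRoot p (pvEnc w c)) (pvRoot p (pvEnc w d))
      else p := rfl
  obtain ⟨hri_mem, hri_root, hri_le⟩ := pvRoot_spec hc hck
  obtain ⟨hrj_mem, hrj_root, hrj_le⟩ := pvRoot_spec hc hdk
  obtain ⟨e1, he1t, he1e, he1r⟩ := pvRoot_reach hc hct hck
  obtain ⟨e2, he2t, he2e, he2r⟩ := pvRoot_reach hc hdt hdk
  set ri := pvRoot p (pvEnc w c) with hri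
  set rj := pvRoot p (pvEnc w d) with hrj
  rcases lt_trichotomy ri rj with hlt | heq | hgt
  · rw [hu, if_pos hlt]
    have hre : ∀ f1 f2 : Int × Int, pvTrav g w h f1 → pvTrav g w h f2 →
        pvEnc w f1 = ri → pvEnc w f2 = rj → pvReach g w h f2 f1 := by
      intro f1 f2 hf1 hf2 hef1 hef2
      have hf1e : f1 = e1 := pvEnc_inj hf1.1 he1t.1 (by rw [hef1, he1e])
      have hf2e : f2 = e2 := pvEnc_inj hf2.1 he2t.1 (by rw [hef2, he2e])
      rw [hf1e, hf2e]
      exact pvReach_trans (pvReach_symm he2r)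
        (pvReach_trans (pvReach_symm hreach) he1r)
    have hform := pvRoot_union_root hc hri_mem hri_root hrj_mem hrj_root hlt
    refine ⟨UFCore_union hc hri_mem hri_root hrj_mem hrj_root hlt hre, ?_, ?_⟩
    · rw [hform _ hck, hform _ hdk, ← hri, ← hrj]
      rw [if_neg (by omega), if_pos rfl]
    · intro j k hj hk hjk
      rw [hform _ hj, hform _ hk, hjk]
  · rw [hu, if_neg (by omega), if_neg (by omega)]
    exact ⟨hc, by rw [← hri, ← hrj, heq], fun j k _ _ hjk => hjk⟩
  · rw [hu, if_neg (by omega), if_pos hgt]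
    have hre : ∀ f1 f2 : Int × Int, pvTrav g w h f1 → pvTrav g w h f2 →
        pvEnc w f1 = rj → pvEnc w f2 = ri → pvReach g w h f2 f1 := by
      intro f1 f2 hf1 hf2 hef1 hef2
      have hf1e : f1 = e2 := pvEnc_inj hf1.1 he2t.1 (by rw [hef1, he2e])
      have hf2e : f2 = e1 := pvEnc_inj hf2.1 he1t.1 (by rw [hef2, he1e])
      rw [hf1e, hf2e]
      exact pvReach_trans (pvReach_symm he1r) (pvReach_trans hreach he2r)
    have hform := pvRoot_union_root hc hrj_mem hrj_root hri_mem hri_root hgt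
    refine ⟨UFCore_union hc hrj_mem hrj_root hri_mem hri_root hgt hre, ?_, ?_⟩
    · rw [hform _ hck, hform _ hdk, ← hri, ← hrj]
      rw [if_pos rfl, if_neg (by omega)]
    · intro j k hj hk hjk
      rw [hform _ hj, hform _ hk, hjk]

-- the build loop as a fold over the scan order
def ufStep (g : List (List Int)) (w h : Int) (p : PySem.Dict Int Int)
    (c : Int × Int) : PySem.Dict Int Int :=
  if (g.getD c.2.toNat []).getD c.1.toNat 0 ≠ 1 then
    let i := c.2 * w + c.1
    let p1 := p.insert i i
    let p2 := if 0 < c.1 ∧ (g.getD c.2.toNat []).getD (c.1-1).toNat 0 ≠ 1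
              then ufUnion p1 i (i-1) else p1
    if 0 < c.2 ∧ (g.getD (c.2-1).toNat []).getD c.1.toNat 0 ≠ 1
    then ufUnion p2 i (i-w) else p2
  else p

theorem ufBuild_eq_fold (g : List (List Int)) (w h : Int) :
    ufBuild g w h = (pvScanL w h).foldl (ufStep g w h) PySem.Dict.empty := by
  unfold ufBuild pvScanL
  rw [List.foldl_flatMap]
  simp only [List.foldl_map]
  rfl

theorem ufStep_inv (g : List (List Int)) (w h : Int) (D : List (Int × Int))
    (c : Int × Int) (p : PySem.Dict Int Int)
    (hcinb : pvInb w h c)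
    (hprefix : ∀ z, (pvInb w h z ∧ pvScanLt z c) ↔ z ∈ D)
    (hcore : UFCore g w h D p) (hconn : UFConn g w h D p) :
    UFCore g w h (D ++ [c]) (ufStep g w h p c) ∧
      UFConn g w h (D ++ [c]) (ufStep g w h p c) := by
  by_cases htc : pvTrav g w h c
  case neg =>
    have hval1 : pvVal g c = 1 := by
      by_contra hne; exact htc ⟨hcinb, hne⟩
    have hstep : ufStep g w h p c = p := by
      unfold ufStep; rw [if_neg (fun hg => hg hval1)]
    have htb : pvTravB g w h c = false := by
      rcases Bool.eq_false_or_eq_true (pvTravB g w h c) with hb | hb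
      · exact absurd (pvTravB_iff.mp hb) htc
      · exact hb
    rw [hstep]
    constructor
    · refine ⟨?_, hcore.nodup, hcore.par_mem, hcore.par_le, hcore.par_reach⟩
      rw [List.filter_append, hcore.keysEq]
      simp [htb]
    · intro a b ha hb hadj
      rcases List.mem_append.mp ha with ha' | ha'
      · rcases List.mem_append.mp hb with hb' | hb'
        · exact hconn a b ha' hb' hadj
        · rcases List.mem_singleton.mp hb' with rfl
          exact absurd hadj.2.1 htc
      · rcases List.mem_singleton.mp ha' with rfl
        exact absurd hadj.1 htc
  case pos =>
    have hfresh : pvEnc w c ∉ p.keys := by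
      intro hmem
      obtain ⟨c0, hc0D, hc0t, hc0e⟩ := hcore.key_cell hmem
      have hc0c : c0 = c := pvEnc_inj hc0t.1 hcinb hc0e
      rw [hc0c] at hc0D
      exact pvScanLt_irrefl c ((hprefix c).mpr hc0D).2
    have hcont : p.contains (pvEnc w c) = false := by
      rcases Bool.eq_false_or_eq_true (p.contains (pvEnc w c)) with hb | hb
      · exact absurd ((PySem.Dict.contains_iff_mem_keys p _).mp hb) hfresh
      · exact hb
    set p1 := p.insert (pvEnc w c) (pvEnc w c) with hp1
    set cL : Int × Int := ((c.1 - 1 : Int), c.2) with hcLdef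
    set cU : Int × Int := (c.1, (c.2 - 1 : Int)) with hcUdef
    have hLe : pvEnc w cL = pvEnc w c - 1 := by
      show c.2 * w + (c.1 - 1) = c.2 * w + c.1 - 1; omega
    have hUe : pvEnc w cU = pvEnc w c - w := by
      show (c.2 - 1) * w + c.1 = c.2 * w + c.1 - w; ring
    have hcore1 : UFCore g w h (D ++ [c]) p1 := UFCore_fresh hcore htc hfresh
    have hkeys1 : p1.keys = p.keys ++ [pvEnc w c] :=
      PySem.Dict.keys_insert_of_not_contains p _ hcont
    have hmem1c : pvEnc w c ∈ p1.keys := by rw [hkeys1]; simp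
    have hold1 : ∀ j ∈ p.keys, pvRoot p1 j = pvRoot p j := pvRoot_fresh hcore hfresh
    have hkeymem : ∀ z ∈ D, pvTrav g w h z → pvEnc w z ∈ p.keys := by
      intro z hz htz
      rw [hcore.keysEq]
      exact List.mem_map_of_mem (List.mem_filter.mpr ⟨hz, pvTravB_iff.mpr htz⟩)
    set p2 := if 0 < c.1 ∧ (g.getD c.2.toNat []).getD (c.1-1).toNat 0 ≠ 1
        then ufUnion p1 (pvEnc w c) (pvEnc w c - 1) else p1 with hp2
    set p3 := if 0 < c.2 ∧ (g.getD (c.2-1).toNat []).getD c.1.toNat 0 ≠ 1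
        then ufUnion p2 (pvEnc w c) (pvEnc w c - w) else p2 with hp3
    have hstep_eq : ufStep g w h p c = p3 := by
      unfold ufStep
      rw [if_pos (show (g.getD c.2.toNat []).getD c.1.toNat 0 ≠ 1 from htc.2)]
      rfl
    have h2 : UFCore g w h (D ++ [c]) p2 ∧
        (∀ j k, j ∈ p1.keys → k ∈ p1.keys → pvRoot p1 j = pvRoot p1 k →
          pvRoot p2 j = pvRoot p2 k) ∧
        (pvAdj g w h c cL → pvRoot p2 (pvEnc w c) = pvRoot p2 (pvEnc w cL)) := by
      by_cases hgl : 0 < c.1 ∧ (g.getD c.2.toNat []).getD (c.1-1).toNat 0 ≠ 1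
      · have htL : pvTrav g w h cL := by
          refine ⟨⟨?_, ?_, ?_, ?_⟩, hgl.2⟩
          · show (0:Int) ≤ c.1 - 1; omega
          · show c.1 - 1 < w; have := hcinb.2.1; omega
          · exact hcinb.2.2.1
          · exact hcinb.2.2.2
        have hLD : cL ∈ D := (hprefix cL).mp ⟨htL.1, Or.inr ⟨rfl, by show c.1 - 1 < c.1; omega⟩⟩
        have hkL1 : pvEnc w cL ∈ p1.keys := by
          rw [hkeys1]
          exact List.mem_append.mpr (.inl (hkeymem cL hLD htL))
        have hadjL : pvAdj g w h c cL :=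
          ⟨htc, htL, by show (c.1 - (c.1-1)).natAbs + (c.2 - c.2).natAbs = 1; omega⟩
        have hreachL : pvReach g w h c cL :=
          Relation.ReflTransGen.single ⟨hadjL, not_false⟩
        have hp2' : p2 = ufUnion p1 (pvEnc w c) (pvEnc w cL) := by
          rw [hp2, if_pos hgl, hLe]
        obtain ⟨hco, heq, hpres⟩ := ufUnion_good hcore1 htc htL hmem1c hkL1 hreachL
        rw [← hp2'] at hco heq hpres
        exact ⟨hco, hpres, fun _ => heq⟩
      · have hp2' : p2 = p1 := by rw [hp2, if_neg hgl]
        rw [hp2']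
        refine ⟨hcore1, fun j k _ _ hjk => hjk, ?_⟩
        intro hadjL
        exfalso
        refine hgl ⟨?_, hadjL.2.1.2⟩
        have h' : (0:Int) ≤ c.1 - 1 := hadjL.2.1.1.1
        omega
    obtain ⟨hcore2, hpres12, heqL2⟩ := h2
    have hkeys2 : p2.keys = p1.keys := by
      rw [hcore2.keysEq, hcore1.keysEq]
    have hmem2c : pvEnc w c ∈ p2.keys := by rw [hkeys2]; exact hmem1c
    have h3 : UFCore g w h (D ++ [c]) p3 ∧
        (∀ j k, j ∈ p2.keys → k ∈ p2.keys → pvRoot p2 j = pvRoot p2 k →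
          pvRoot p3 j = pvRoot p3 k) ∧
        (pvAdj g w h c cU → pvRoot p3 (pvEnc w c) = pvRoot p3 (pvEnc w cU)) := by
      by_cases hgu : 0 < c.2 ∧ (g.getD (c.2-1).toNat []).getD c.1.toNat 0 ≠ 1
      · have htU : pvTrav g w h cU := by
          refine ⟨⟨?_, ?_, ?_, ?_⟩, hgu.2⟩
          · exact hcinb.1
          · exact hcinb.2.1
          · show (0:Int) ≤ c.2 - 1; omega
          · show c.2 - 1 < h; have := hcinb.2.2.2; omega
        have hUD : cU ∈ D := (hprefix cU).mp ⟨htU.1, Or.inl (by show c.2 - 1 < c.2; omega)⟩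
        have hkU2 : pvEnc w cU ∈ p2.keys := by
          rw [hkeys2, hkeys1]
          exact List.mem_append.mpr (.inl (hkeymem cU hUD htU))
        have hadjU : pvAdj g w h c cU :=
          ⟨htc, htU, by show (c.1 - c.1).natAbs + (c.2 - (c.2-1)).natAbs = 1; omega⟩
        have hreachU : pvReach g w h c cU :=
          Relation.ReflTransGen.single ⟨hadjU, not_false⟩
        have hp3' : p3 = ufUnion p2 (pvEnc w c) (pvEnc w cU) := by
          rw [hp3, if_pos hgu, hUe]
        obtain ⟨hco, heq, hpres⟩ := ufUnion_good hcore2 htc htU hmem2c hkU2 hreachU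
        rw [← hp3'] at hco heq hpres
        exact ⟨hco, hpres, fun _ => heq⟩
      · have hp3' : p3 = p2 := by rw [hp3, if_neg hgu]
        rw [hp3']
        refine ⟨hcore2, fun j k _ _ hjk => hjk, ?_⟩
        intro hadjU
        exfalso
        refine hgu ⟨?_, hadjU.2.1.2⟩
        have h' : (0:Int) ≤ c.2 - 1 := hadjU.2.1.1.2.2.1
        omega
    obtain ⟨hcore3, hpres23, heqU3⟩ := h3
    rw [hstep_eq]
    refine ⟨hcore3, ?_⟩
    -- roots of old keys transported to p3
    have hlift : ∀ j k, j ∈ p.keys → k ∈ p.keys → pvRoot p j = pvRoot p k →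
        pvRoot p3 j = pvRoot p3 k := by
      intro j k hj hk hjk
      have hj1 : j ∈ p1.keys := by rw [hkeys1]; exact List.mem_append.mpr (.inl hj)
      have hk1 : k ∈ p1.keys := by rw [hkeys1]; exact List.mem_append.mpr (.inl hk)
      have h12 := hpres12 j k hj1 hk1 (by rw [hold1 j hj, hold1 k hk, hjk])
      exact hpres23 j k (by rw [hkeys2]; exact hj1) (by rw [hkeys2]; exact hk1) h12
    have heqL3 : pvAdj g w h c cL → pvRoot p3 (pvEnc w c) = pvRoot p3 (pvEnc w cL) := by
      intro hadjL
      have hkL1 : pvEnc w cL ∈ p1.keys := by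
        rw [hkeys1]
        refine List.mem_append.mpr (.inl (hkeymem cL ?_ hadjL.2.1))
        exact (hprefix cL).mp ⟨hadjL.2.1.1, Or.inr ⟨rfl, by show c.1 - 1 < c.1; omega⟩⟩
      exact hpres23 _ _ hmem2c (by rw [hkeys2]; exact hkL1) (heqL2 hadjL)
    -- the new connectivity
    intro a b ha hb hadj
    have hta := hadj.1
    have htb := hadj.2.1
    rcases List.mem_append.mp ha with haD | haC
    · rcases List.mem_append.mp hb with hbD | hbC
      · exact hlift _ _ (hkeymem a haD hta) (hkeymem b hbD htb)
          (hconn a b haD hbD hadj)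
      · have hbc : b = c := List.mem_singleton.mp hbC
        rw [hbc] at hadj ⊢
        -- a is adjacent to c and earlier in scan order: a = cL or a = cU
        have hlt := ((hprefix a).mpr haD).2
        have hdist := hadj.2.2
        have hcases : a = cL ∨ a = cU := by
          unfold pvScanLt at hlt
          rcases hlt with hy | ⟨hy, hx⟩
          · right
            rw [hcUdef]
            have h1 : a.1 = c.1 := by omega
            have h2 : a.2 = c.2 - 1 := by omega
            exact Prod.ext (by rw [h1]) (by rw [h2])
          · left
            rw [hcLdef]
            have h1 : a.1 = c.1 - 1 := by omega
            have h2 : a.2 = c.2 := by omega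
            exact Prod.ext (by rw [h1]) (by rw [h2])
        rcases hcases with rfl | rfl
        · exact (heqL3 (pvAdj_symm hadj)).symm
        · exact (heqU3 (pvAdj_symm hadj)).symm
    · have hac : a = c := List.mem_singleton.mp haC
      rw [hac] at hadj ⊢
      rcases List.mem_append.mp hb with hbD | hbC
      · have hlt := ((hprefix b).mpr hbD).2
        have hdist := hadj.2.2
        have hcases : b = cL ∨ b = cU := by
          unfold pvScanLt at hlt
          rcases hlt with hy | ⟨hy, hx⟩
          · right
            rw [hcUdef]
            have h1 : b.1 = c.1 := by omega
            have h2 : b.2 = c.2 - 1 := by omega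
            exact Prod.ext (by rw [h1]) (by rw [h2])
          · left
            rw [hcLdef]
            have h1 : b.1 = c.1 - 1 := by omega
            have h2 : b.2 = c.2 := by omega
            exact Prod.ext (by rw [h1]) (by rw [h2])
        rcases hcases with rfl | rfl
        · exact heqL3 hadj
        · exact heqU3 hadj
      · have hbc : b = c := List.mem_singleton.mp hbC
        rw [hbc]

theorem ufBuild_inv (g : List (List Int)) (w h : Int) :
    UFCore g w h (pvScanL w h) (ufBuild g w h) ∧
      UFConn g w h (pvScanL w h) (ufBuild g w h) := by
  rw [ufBuild_eq_fold]
  suffices H : ∀ (R D : List (Int × Int)) (p : PySem.Dict Int Int),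
      pvScanL w h = D ++ R → UFCore g w h D p → UFConn g w h D p →
      UFCore g w h (pvScanL w h) (R.foldl (ufStep g w h) p) ∧
        UFConn g w h (pvScanL w h) (R.foldl (ufStep g w h) p) by
    refine H (pvScanL w h) [] PySem.Dict.empty (List.nil_append _).symm ?_ ?_
    · refine ⟨by simp [PySem.Dict.keys, PySem.Dict.empty], by simp [PySem.Dict.keys, PySem.Dict.empty], ?_, ?_, ?_⟩
      · intro j hj; simp [PySem.Dict.keys, PySem.Dict.empty] at hj
      · intro j hj; simp [PySem.Dict.keys, PySem.Dict.empty] at hj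
      · intro c' d' _ _ hk _; simp [PySem.Dict.keys, PySem.Dict.empty] at hk
    · intro a b ha _ _; simp at ha
  intro R
  induction R with
  | nil =>
    intro D p hsplit hcore hconn
    rw [List.append_nil] at hsplit
    subst hsplit
    exact ⟨hcore, hconn⟩
  | cons c R' ih =>
    intro D p hsplit hcore hconn
    have hpw : (D ++ c :: R').Pairwise pvScanLt := hsplit ▸ pvScanL_pairwise w h
    have hcinb : pvInb w h c := by
      refine (pvScanL_mem w h c).mp ?_
      rw [hsplit]; simp
    have hsplit' : pvScanL w h = (D ++ [c]) ++ R' := by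
      rw [hsplit, List.append_assoc]; rfl
    have hprefix : ∀ z, (pvInb w h z ∧ pvScanLt z c) ↔ z ∈ D := by
      intro z
      constructor
      · rintro ⟨hzi, hzlt⟩
        have hzscan : z ∈ D ++ c :: R' := by
          rw [← hsplit]; exact (pvScanL_mem w h z).mpr hzi
        rcases List.mem_append.mp hzscan with hz | hz
        · exact hz
        · rcases List.mem_cons.mp hz with rfl | hz
          · exact absurd hzlt (by unfold pvScanLt; omega)
          · have := (List.pairwise_cons.mp (List.pairwise_append.mp hpw).2.1).1 z hz
            unfold pvScanLt at hzlt this; omega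
      · intro hzD
        refine ⟨(pvScanL_mem w h z).mp (by rw [hsplit]; simp [hzD]), ?_⟩
        exact hpw.rel_of_mem_append hzD (List.mem_cons_self)
    obtain ⟨hco, hcn⟩ := ufStep_inv g w h D c p hcinb hprefix hcore hconn
    rw [List.foldl_cons]
    exact ih (D ++ [c]) _ hsplit' hco hcn

-- same root ⟷ reachable, for the final union-find
theorem pvRootConn_mpr (g : List (List Int)) (w h : Int)
    (hcore : UFCore g w h (pvScanL w h) (ufBuild g w h))
    (hconn : UFConn g w h (pvScanL w h) (ufBuild g w h)) :
    ∀ c d, pvTrav g w h c → pvTrav g w h d → pvReach g w h c d →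
      pvRoot (ufBuild g w h) (pvEnc w c) = pvRoot (ufBuild g w h) (pvEnc w d) := by
  intro c d htc htd hr
  clear htd
  induction hr with
  | refl => rfl
  | tail hce hstep ih =>
    rename_i e d'
    have hte : pvTrav g w h e := hstep.1.1
    refine (ih).trans ?_
    exact hconn e d' ((pvScanL_mem w h e).mpr hte.1)
      ((pvScanL_mem w h d').mpr hstep.1.2.1.1) hstep.1

theorem pvRootConn_mp (g : List (List Int)) (w h : Int)
    (hcore : UFCore g w h (pvScanL w h) (ufBuild g w h)) :
    ∀ c d, pvTrav g w h c → pvTrav g w h d →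
      pvRoot (ufBuild g w h) (pvEnc w c) = pvRoot (ufBuild g w h) (pvEnc w d) →
      pvReach g w h c d := by
  intro c d htc htd hrr
  have hkc : pvEnc w c ∈ (ufBuild g w h).keys := by
    rw [hcore.keysEq]
    exact List.mem_map_of_mem (List.mem_filter.mpr
      ⟨(pvScanL_mem w h c).mpr htc.1, pvTravB_iff.mpr htc⟩)
  have hkd : pvEnc w d ∈ (ufBuild g w h).keys := by
    rw [hcore.keysEq]
    exact List.mem_map_of_mem (List.mem_filter.mpr
      ⟨(pvScanL_mem w h d).mpr htd.1, pvTravB_iff.mpr htd⟩)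
  obtain ⟨e1, he1t, he1e, he1r⟩ := pvRoot_reach hcore htc hkc
  obtain ⟨e2, he2t, he2e, he2r⟩ := pvRoot_reach hcore htd hkd
  have he12 : e1 = e2 := pvEnc_inj he1t.1 he2t.1 (by rw [he1e, he2e, hrr])
  rw [he12] at he1r
  exact pvReach_trans he1r (pvReach_symm he2r)

-- ===== the counting loop of port B =====

def pvKL (g : List (List Int)) (w h : Int) : List (Int × Int) :=
  (pvScanL w h).filter (pvTravB g w h)

-- the scan-order-first white cell of its component (computable: root comparison)
def pvScanLtB (a b : Int × Int) : Bool :=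
  decide (a.2 < b.2) || (decide (a.2 = b.2) && decide (a.1 < b.1))

theorem pvScanLtB_iff {a b : Int × Int} : pvScanLtB a b = true ↔ pvScanLt a b := by
  unfold pvScanLtB pvScanLt; simp

def pvLeadB (g : List (List Int)) (w h : Int) (p : PySem.Dict Int Int)
    (c : Int × Int) : Bool :=
  decide (pvVal g c = 0) &&
    (pvKL g w h).all (fun d => !(decide (pvVal g d = 0) &&
      (pvRoot p (pvEnc w d) == pvRoot p (pvEnc w c)) && pvScanLtB d c))

theorem pvKL_pairwise (g : List (List Int)) (w h : Int) :
    (pvKL g w h).Pairwise pvScanLt :=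
  List.Pairwise.filter _ (pvScanL_pairwise w h)

theorem pvKL_mem (g : List (List Int)) (w h : Int) (c : Int × Int) :
    c ∈ pvKL g w h ↔ pvTrav g w h c := by
  unfold pvKL
  rw [List.mem_filter, pvScanL_mem, pvTravB_iff]
  constructor
  · exact fun hx => hx.2
  · exact fun hx => ⟨hx.1, hx⟩

-- every white cell's class has a leader no later in scan order
theorem pvLead_exists (g : List (List Int)) (w h : Int) (p : PySem.Dict Int Int) :
    ∀ d ∈ pvKL g w h, pvVal g d = 0 →
      ∃ c0 ∈ pvKL g w h, pvLeadB g w h p c0 = true ∧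
        pvRoot p (pvEnc w c0) = pvRoot p (pvEnc w d) ∧ (pvScanLt c0 d ∨ c0 = d) := by
  intro d hd hd0
  set L := (pvKL g w h).filter (fun e => decide (pvVal g e = 0) &&
      (pvRoot p (pvEnc w e) == pvRoot p (pvEnc w d))) with hLdef
  have hdL : d ∈ L := by
    rw [hLdef]
    exact List.mem_filter.mpr ⟨hd, by simp [hd0]⟩
  have hLpw : L.Pairwise pvScanLt := List.Pairwise.filter _ (pvKL_pairwise g w h)
  obtain ⟨c0, t, hLt⟩ : ∃ c0 t, L = c0 :: t := by
    cases hLc : L with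
    | nil => rw [hLc] at hdL; simp at hdL
    | cons x xs => exact ⟨x, xs, rfl⟩
  have hc0L : c0 ∈ L := by rw [hLt]; exact List.mem_cons_self
  have hc0KL : c0 ∈ pvKL g w h := (List.mem_filter.mp (hLdef ▸ hc0L)).1
  have hc0props := (List.mem_filter.mp (hLdef ▸ hc0L)).2
  rw [Bool.and_eq_true] at hc0props
  have hc0v : pvVal g c0 = 0 := by simpa using hc0props.1
  have hc0r : pvRoot p (pvEnc w c0) = pvRoot p (pvEnc w d) := by simpa using hc0props.2
  have hhead : ∀ e ∈ L, e = c0 ∨ pvScanLt c0 e := by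
    intro e he
    rw [hLt] at he
    rcases List.mem_cons.mp he with rfl | ht
    · exact .inl rfl
    · exact .inr ((List.pairwise_cons.mp (hLt ▸ hLpw)).1 e ht)
  refine ⟨c0, hc0KL, ?_, hc0r, ?_⟩
  · unfold pvLeadB
    rw [Bool.and_eq_true, List.all_eq_true]
    refine ⟨by simp [hc0v], ?_⟩
    intro e heKL
    by_cases hbad : pvVal g e = 0 ∧ pvRoot p (pvEnc w e) = pvRoot p (pvEnc w c0) ∧
        pvScanLt e c0
    · exfalso
      have heL : e ∈ L := by
        rw [hLdef]
        exact List.mem_filter.mpr ⟨heKL, by simp [hbad.1, hbad.2.1.trans hc0r]⟩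
      rcases hhead e heL with rfl | hgt
      · exact pvScanLt_irrefl e hbad.2.2
      · exact pvScanLt_irrefl e (pvScanLt_trans hbad.2.2 hgt)
    · have hfalse : (decide (pvVal g e = 0) &&
          (pvRoot p (pvEnc w e) == pvRoot p (pvEnc w c0)) && pvScanLtB e c0) = false := by
        rcases Bool.eq_false_or_eq_true (decide (pvVal g e = 0) &&
            (pvRoot p (pvEnc w e) == pvRoot p (pvEnc w c0)) && pvScanLtB e c0) with hb | hb
        · rw [Bool.and_eq_true, Bool.and_eq_true] at hb
          exact absurd ⟨by simpa using hb.1.1, by simpa using hb.1.2,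
            pvScanLtB_iff.mp hb.2⟩ hbad
        · exact hb
      simp [hfalse]
  · rcases hhead d hdL with rfl | hlt
    · exact .inr rfl
    · exact .inl hlt

-- the counting step of port B, as a function of the cell
def ufCStep (g : List (List Int)) (w h : Int) (p : PySem.Dict Int Int)
    (st : PySem.Set Int × PySem.Set Int) (c : Int × Int) :
    PySem.Set Int × PySem.Set Int :=
  ((if (g.getD c.2.toNat []).getD c.1.toNat 0 = 0
      then PySem.Set.add st.1 (pvRoot p (pvEnc w c)) else st.1),
   (if c.1 = 0 ∨ c.2 = 0 ∨ c.1 = w - 1 ∨ c.2 = h - 1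
      then PySem.Set.add st.2 (pvRoot p (pvEnc w c)) else st.2))

-- the port's counting step, as a function of the key
def ufPStep (g : List (List Int)) (w h : Int) (p : PySem.Dict Int Int)
    (st : PySem.Set Int × PySem.Set Int) (i : Int) : PySem.Set Int × PySem.Set Int :=
  ((if (g.getD (PySem.Int.floordiv i w).toNat []).getD (PySem.Int.mod i w).toNat 0 = 0
      then PySem.Set.add st.1 (ufFind p (p.size + 1) i) else st.1),
   (if PySem.Int.mod i w = 0 ∨ PySem.Int.floordiv i w = 0 ∨
        PySem.Int.mod i w = w - 1 ∨ PySem.Int.floordiv i w = h - 1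
      then PySem.Set.add st.2 (ufFind p (p.size + 1) i) else st.2))

theorem pvDec_enc {w : Int} {c : Int × Int} (h0 : 0 ≤ c.1) (h1 : c.1 < w) :
    PySem.Int.floordiv (pvEnc w c) w = c.2 ∧ PySem.Int.mod (pvEnc w c) w = c.1 := by
  have hwpos : (0:Int) < w := by omega
  constructor
  · rw [PySem.Int.floordiv_eq_ediv_of_pos hwpos]
    show (c.2 * w + c.1) / w = c.2
    rw [add_comm, Int.add_mul_ediv_right _ _ (by omega : w ≠ 0),
      Int.ediv_eq_zero_of_lt h0 h1, zero_add]
  · rw [PySem.Int.mod_eq_emod_of_pos hwpos]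
    show (c.2 * w + c.1) % w = c.1
    rw [add_comm, Int.add_mul_emod_self_right, Int.emod_eq_of_lt h0 h1]

theorem ufPStep_eq_ufCStep (g : List (List Int)) (w h : Int) (p : PySem.Dict Int Int)
    (st : PySem.Set Int × PySem.Set Int) (c : Int × Int) (h0 : 0 ≤ c.1) (h1 : c.1 < w) :
    ufPStep g w h p st (pvEnc w c) = ufCStep g w h p st c := by
  obtain ⟨hd, hm⟩ := pvDec_enc h0 h1
  unfold ufPStep ufCStep
  rw [hd, hm]
  rfl

theorem ufCount_fold (g : List (List Int)) (w h : Int) (p : PySem.Dict Int Int) :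
    ∀ (S D1 : List (Int × Int)), pvKL g w h = D1 ++ S →
      ∀ st : PySem.Set Int × PySem.Set Int,
      st.1 = (D1.filter (pvLeadB g w h p)).map (fun c => pvRoot p (pvEnc w c)) →
      (∀ r, r ∈ st.2 ↔ ∃ b ∈ D1, pvBorder w h b ∧ pvRoot p (pvEnc w b) = r) →
      ((S.foldl (ufCStep g w h p) st).1
          = ((pvKL g w h).filter (pvLeadB g w h p)).map (fun c => pvRoot p (pvEnc w c)) ∧
       (∀ r, r ∈ (S.foldl (ufCStep g w h p) st).2 ↔
          ∃ b ∈ pvKL g w h, pvBorder w h b ∧ pvRoot p (pvEnc w b) = r)) := by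
  intro S
  induction S with
  | nil =>
    intro D1 hsplit st h1 h2
    rw [List.append_nil] at hsplit
    subst hsplit
    exact ⟨h1, h2⟩
  | cons c S' ih =>
    intro D1 hsplit st h1 h2
    have hcKL : c ∈ pvKL g w h := by rw [hsplit]; simp
    have hctrav : pvTrav g w h c := (pvKL_mem g w h c).mp hcKL
    have hsplit' : pvKL g w h = (D1 ++ [c]) ++ S' := by
      rw [hsplit, List.append_assoc]; rfl
    have hpw : (D1 ++ c :: S').Pairwise pvScanLt := hsplit ▸ pvKL_pairwise g w h
    have hD1lt : ∀ z ∈ D1, pvScanLt z c :=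
      fun z hz => hpw.rel_of_mem_append hz List.mem_cons_self
    have hinD1 : ∀ e ∈ pvKL g w h, pvScanLt e c → e ∈ D1 := by
      intro e he hlt
      rw [hsplit] at he
      rcases List.mem_append.mp he with he' | he'
      · exact he'
      · rcases List.mem_cons.mp he' with rfl | he''
        · exact absurd hlt (pvScanLt_irrefl e)
        · exfalso
          have := (List.pairwise_cons.mp (List.pairwise_append.mp hpw).2.1).1 e he''
          exact pvScanLt_irrefl e (pvScanLt_trans hlt this)
    rw [List.foldl_cons]
    refine ih (D1 ++ [c]) hsplit' (ufCStep g w h p st c) ?_ ?_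
    · show (if (g.getD c.2.toNat []).getD c.1.toNat 0 = 0
          then PySem.Set.add st.1 (pvRoot p (pvEnc w c)) else st.1) = _
      rw [List.filter_append]
      by_cases hv : pvVal g c = 0
      · rw [if_pos (show (g.getD c.2.toNat []).getD c.1.toNat 0 = 0 from hv)]
        by_cases hlead : pvLeadB g w h p c = true
        · have hnotin : pvRoot p (pvEnc w c) ∉ st.1 := by
            rw [h1]
            intro hmem
            obtain ⟨c', hc'f, hc'e⟩ := List.mem_map.mp hmem
            obtain ⟨hc'D, hc'lead⟩ := List.mem_filter.mp hc'f
            have hc'KL : c' ∈ pvKL g w h := by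
              rw [hsplit]; exact List.mem_append.mpr (.inl hc'D)
            have hc'0 : pvVal g c' = 0 := by
              unfold pvLeadB at hc'lead
              rw [Bool.and_eq_true] at hc'lead
              simpa using hc'lead.1
            unfold pvLeadB at hlead
            rw [Bool.and_eq_true, List.all_eq_true] at hlead
            have hall := hlead.2 c' hc'KL
            rw [Bool.not_eq_eq_eq_not, Bool.not_true] at hall
            have htrue : (decide (pvVal g c' = 0) &&
                (pvRoot p (pvEnc w c') == pvRoot p (pvEnc w c)) && pvScanLtB c' c) = true := by
              rw [Bool.and_eq_true, Bool.and_eq_true]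
              exact ⟨⟨by simp [hc'0], by simp [hc'e]⟩,
                pvScanLtB_iff.mpr (hD1lt c' hc'D)⟩
            rw [hall] at htrue
            exact absurd htrue (by simp)
          rw [PySem.Set.add_of_not_mem hnotin, h1,
            show List.filter (pvLeadB g w h p) [c] = [c] by simp [hlead],
            List.map_append]
          rfl
        · have hlead' : pvLeadB g w h p c = false := by
            rcases Bool.eq_false_or_eq_true (pvLeadB g w h p c) with hb | hb
            · exact absurd hb hlead
            · exact hb
          have hbad : ∃ e ∈ pvKL g w h, pvVal g e = 0 ∧
              pvRoot p (pvEnc w e) = pvRoot p (pvEnc w c) ∧ pvScanLt e c := by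
            by_contra hno
            push_neg at hno
            apply hlead
            unfold pvLeadB
            rw [Bool.and_eq_true, List.all_eq_true]
            refine ⟨by simp [hv], ?_⟩
            intro e heKL
            rw [Bool.not_eq_eq_eq_not, Bool.not_true]
            rcases Bool.eq_false_or_eq_true (decide (pvVal g e = 0) &&
                (pvRoot p (pvEnc w e) == pvRoot p (pvEnc w c)) && pvScanLtB e c) with hb | hb
            · rw [Bool.and_eq_true, Bool.and_eq_true] at hb
              exact absurd (pvScanLtB_iff.mp hb.2)
                (hno e heKL (by simpa using hb.1.1) (by simpa using hb.1.2))
            · exact hb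
          obtain ⟨e, heKL, he0, her, helt⟩ := hbad
          have heD1 : e ∈ D1 := hinD1 e heKL helt
          obtain ⟨c0, hc0KL, hc0lead, hc0r, hc0le⟩ := pvLead_exists g w h p e heKL he0
          have hc0D1 : c0 ∈ D1 := by
            rcases hc0le with hlt0 | rfl
            · exact hinD1 c0 hc0KL (pvScanLt_trans hlt0 (hD1lt e heD1))
            · exact heD1
          have hmem : pvRoot p (pvEnc w c) ∈ st.1 := by
            rw [h1]
            refine List.mem_map.mpr ⟨c0, List.mem_filter.mpr ⟨hc0D1, hc0lead⟩, ?_⟩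
            rw [hc0r, her]
          rw [PySem.Set.add_of_mem hmem, h1,
            show List.filter (pvLeadB g w h p) [c] = [] by simp [hlead'],
            List.append_nil]
      · rw [if_neg (show ¬ (g.getD c.2.toNat []).getD c.1.toNat 0 = 0 from hv)]
        have hlead' : pvLeadB g w h p c = false := by
          unfold pvLeadB
          simp [hv]
        rw [h1, show List.filter (pvLeadB g w h p) [c] = [] by simp [hlead'],
          List.append_nil]
    · intro r
      show r ∈ (if c.1 = 0 ∨ c.2 = 0 ∨ c.1 = w - 1 ∨ c.2 = h - 1
          then PySem.Set.add st.2 (pvRoot p (pvEnc w c)) else st.2) ↔ _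
      by_cases hb : pvBorder w h c
      · rw [if_pos (show c.1 = 0 ∨ c.2 = 0 ∨ c.1 = w - 1 ∨ c.2 = h - 1 from hb)]
        constructor
        · intro hr
          rcases (PySem.Set.mem_add st.2 _ r).mp hr with hr' | hr'
          · obtain ⟨b, hbD, hbb', hbr⟩ := (h2 r).mp hr'
            exact ⟨b, List.mem_append.mpr (.inl hbD), hbb', hbr⟩
          · exact ⟨c, List.mem_append.mpr (.inr (List.mem_singleton.mpr rfl)), hb, hr'.symm⟩
        · rintro ⟨b, hbD, hbb', hbr⟩
          rcases List.mem_append.mp hbD with hm | hm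
          · exact (PySem.Set.mem_add st.2 _ r).mpr (.inl ((h2 r).mpr ⟨b, hm, hbb', hbr⟩))
          · rcases List.mem_singleton.mp hm with rfl
            exact (PySem.Set.mem_add st.2 _ r).mpr (.inr hbr.symm)
      · rw [if_neg (show ¬ (c.1 = 0 ∨ c.2 = 0 ∨ c.1 = w - 1 ∨ c.2 = h - 1) from hb)]
        rw [h2 r]
        constructor
        · rintro ⟨b, hbD, hbb', hbr⟩
          exact ⟨b, List.mem_append.mpr (.inl hbD), hbb', hbr⟩
        · rintro ⟨b, hbD, hbb', hbr⟩
          rcases List.mem_append.mp hbD with hm | hm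
          · exact ⟨b, hm, hbb', hbr⟩
          · rcases List.mem_singleton.mp hm with rfl
            exact absurd hbb' hb

theorem pvB_aux (g : List (List Int)) (w h : Int)
    (hcore : UFCore g w h (pvScanL w h) (ufBuild g w h))
    (hconn : UFConn g w h (pvScanL w h) (ufBuild g w h)) :
    PySem.List.len (PySem.Set.diff
      ((ufBuild g w h).keys.foldl (ufPStep g w h (ufBuild g w h))
        (PySem.Set.empty, PySem.Set.empty)).1
      ((ufBuild g w h).keys.foldl (ufPStep g w h (ufBuild g w h))
        (PySem.Set.empty, PySem.Set.empty)).2)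
      = (pvScanL w h).foldl (pvStepB g w h) 0 := by
  set P := ufBuild g w h with hP
  have hkeys : P.keys = (pvKL g w h).map (pvEnc w) := hcore.keysEq
  rw [hkeys, List.foldl_map]
  have hcongr : ∀ st : PySem.Set Int × PySem.Set Int, ∀ c ∈ pvKL g w h,
      ufPStep g w h P st (pvEnc w c) = ufCStep g w h P st c := by
    intro st c hc
    have htc := (pvKL_mem g w h c).mp hc
    exact ufPStep_eq_ufCStep g w h P st c htc.1.1 htc.1.2.1
  rw [PySem.List.foldl_congr_mem _ _ _ _ hcongr]
  obtain ⟨hw1, hw2⟩ := ufCount_fold g w h P (pvKL g w h) [] rfl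
    (PySem.Set.empty, PySem.Set.empty) (by simp [PySem.Set.empty])
    (by intro r; simp [PySem.Set.empty])
  set wb := (pvKL g w h).foldl (ufCStep g w h P) (PySem.Set.empty, PySem.Set.empty) with hwb
  -- right-hand side: the probe count as a countP over the scan order
  have hstepB : pvStepB g w h = fun acc c =>
      if (decide (pvVal g c = 0) && probe g w h c.1 c.2) = true then acc + 1 else acc := by
    funext acc c
    unfold pvStepB
    by_cases h1 : pvVal g c = 0 <;> by_cases h2 : probe g w h c.1 c.2 = true
    · rw [if_pos ⟨h1, h2⟩, if_pos (by simp [h1, h2])]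
    · rw [if_neg (fun hx => h2 hx.2), if_neg (by simp [h2])]
    · rw [if_neg (fun hx => h1 hx.1), if_neg (by simp [h1])]
    · rw [if_neg (fun hx => h1 hx.1), if_neg (by simp [h1])]
  rw [hstepB, PySem.List.foldl_count_if, zero_add]
  -- left-hand side: a countP over the scan order as well
  have hdiff : PySem.Set.diff wb.1 wb.2
      = wb.1.filter (fun x => !(PySem.Set.contains wb.2 x)) := rfl
  rw [hdiff, hw1, List.filter_map, PySem.List.len_eq, List.length_map,
    ← List.countP_eq_length_filter, List.countP_filter]
  show (((pvScanL w h).filter (pvTravB g w h)).countP _ : Int) = _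
  rw [List.countP_filter]
  congr 1
  apply List.countP_congr
  intro c hcscan
  have hcinb : pvInb w h c := (pvScanL_mem w h c).mp hcscan
  have hmemwb2 : ∀ r, r ∈ wb.2 ↔
      ∃ b ∈ pvKL g w h, pvBorder w h b ∧ pvRoot P (pvEnc w b) = r := hw2
  simp only [Function.comp_apply, Bool.and_eq_true]
  constructor
  · rintro ⟨⟨hnb, hld⟩, htb⟩
    have htrav : pvTrav g w h c := pvTravB_iff.mp htb
    have hv' : pvVal g c = 0 := by
      unfold pvLeadB at hld
      rw [Bool.and_eq_true] at hld
      simpa using hld.1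
    have hnb' : pvRoot P (pvEnc w c) ∉ wb.2 := by
      intro hm
      rw [(PySem.Set.contains_iff wb.2 _).mpr hm] at hnb
      simp at hnb
    refine ⟨by simp [hv'], ?_⟩
    rw [probe_spec htrav]
    constructor
    · intro d hr hbd
      refine hnb' ((hmemwb2 _).mpr ?_)
      rcases pvRA_trav_right hr with rfl | htd
      · exact ⟨c, (pvKL_mem g w h c).mpr htrav, hbd, rfl⟩
      · exact ⟨d, (pvKL_mem g w h d).mpr htd, hbd,
          (pvRootConn_mpr g w h hcore hconn c d htrav htd hr).symm⟩
    · rintro d hr ⟨hd0, hdlt⟩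
      rcases pvRA_trav_right hr with rfl | htd
      · exact pvScanLt_irrefl c hdlt
      · have hroot : pvRoot P (pvEnc w c) = pvRoot P (pvEnc w d) :=
          pvRootConn_mpr g w h hcore hconn c d htrav htd hr
        unfold pvLeadB at hld
        rw [Bool.and_eq_true, List.all_eq_true] at hld
        have hall := hld.2 d ((pvKL_mem g w h d).mpr htd)
        rw [Bool.not_eq_eq_eq_not, Bool.not_true] at hall
        have htrue : (decide (pvVal g d = 0) &&
            (pvRoot P (pvEnc w d) == pvRoot P (pvEnc w c)) && pvScanLtB d c) = true := by
          rw [Bool.and_eq_true, Bool.and_eq_true]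
          exact ⟨⟨by simp [hd0], by simp [hroot.symm]⟩, pvScanLtB_iff.mpr hdlt⟩
        rw [hall] at htrue
        exact absurd htrue (by simp)
  · rintro ⟨hv, hpr⟩
    have hv' : pvVal g c = 0 := by simpa using hv
    have htrav : pvTrav g w h c := ⟨hcinb, by rw [hv']; decide⟩
    obtain ⟨hp1, hp2⟩ := (probe_spec htrav).mp hpr
    refine ⟨⟨?nb, ?ld⟩, pvTravB_iff.mpr htrav⟩
    case ld =>
      unfold pvLeadB
      rw [Bool.and_eq_true, List.all_eq_true]
      refine ⟨by simp [hv'], ?_⟩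
      intro e heKL
      rw [Bool.not_eq_eq_eq_not, Bool.not_true]
      rcases Bool.eq_false_or_eq_true (decide (pvVal g e = 0) &&
          (pvRoot P (pvEnc w e) == pvRoot P (pvEnc w c)) && pvScanLtB e c) with hb | hb
      · rw [Bool.and_eq_true, Bool.and_eq_true] at hb
        have hte := (pvKL_mem g w h e).mp heKL
        have her : pvRoot P (pvEnc w c) = pvRoot P (pvEnc w e) := by
          have := hb.1.2
          simp only [beq_iff_eq] at this
          exact this.symm
        have hre : pvReach g w h c e := pvRootConn_mp g w h hcore c e htrav hte her
        exact absurd ⟨by simpa using hb.1.1, pvScanLtB_iff.mp hb.2⟩ (hp2 e hre)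
      · exact hb
    case nb =>
      have hnm : pvRoot P (pvEnc w c) ∉ wb.2 := by
        intro hm
        obtain ⟨b, hbKL, hbb, hbr⟩ := (hmemwb2 _).mp hm
        have htb' := (pvKL_mem g w h b).mp hbKL
        have hre : pvReach g w h c b := pvRootConn_mp g w h hcore c b htrav htb' hbr.symm
        exact (hp1 b hre) hbb
      simpa using hnm

theorem pvB_eq_probeCount (g : List (List Int)) :
    count_holes_alt g = (pvScanL ((g.headD []).length : Int) (g.length : Int)).foldl
      (pvStepB g ((g.headD []).length : Int) (g.length : Int)) 0 := by
  obtain ⟨hcore, hconn⟩ := ufBuild_inv g ((g.headD []).length : Int) (g.length : Int)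
  exact pvB_aux g ((g.headD []).length : Int) (g.length : Int) hcore hconn

-- ===== final assembly =====

theorem pvFinal (g : List (List Int)) : count_holes g = count_holes_alt g := by
  rw [pvA_eq_probeCount, pvB_eq_probeCount]

-- ===== VERDICT (by name: the statement is the Claim_ definition above) =====
theorem count_holes_spec : Claim_equal_count_holes :=
  fun subimg _ _ => pvFinal subimg
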